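-- pv_equiv track=rewrite | github.com/981377660LMT/algorithm-study | 6_tree/经典题/后序dfs统计信息/经过边的路径数.py | solve
-- ===== SOURCE A (Python) =====
-- from collections import defaultdict
-- from typing import Counter, List, Tuple
--
-- def solve(edges: List[Tuple[int, int]]) -> List[int]:
--     """
--     每条不同路径可表示为(start,end)对
--     包含的路径数等价于父节点上面*子节点下面连接
--     """
--
--     def dfs(cur: int, parent: int) -> int:
--         """统计子树结点数"""
--         counter[cur] += 1
--         for next in adjMap[cur]:
--             if next != parent:
--                 counter[cur] += dfs(next, cur)
--         return counter[cur]
--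
--     adjMap = defaultdict(set)
--     for u, v in edges:
--         adjMap[u].add(v)
--         adjMap[v].add(u)
--
--     counter = Counter()
--     dfs(0, -1)
--
--     res = []
--     for u, v in edges:
--         min_ = min(counter[u], counter[v])
--         res.append(min_ * (counter[0] - min_))
--     return res
-- ===== SOURCE B (Python) =====
-- def solve(edges):
--     adj = {}
--     for u, v in edges:
--         adj.setdefault(u, set()).add(v)
--         adj.setdefault(v, set()).add(u)
--
--     # iterative DFS from 0: visitation order + parent of each discovered node
--     visited = {0}
--     parent = {}
--     order = []
--     stack = [0]
--     while stack:
--         cur = stack.pop()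
--         order.append(cur)
--         for nxt in adj.get(cur, ()):
--             if nxt not in visited:
--                 visited.add(nxt)
--                 parent[nxt] = cur
--                 stack.append(nxt)
--
--     # reverse (post) order: every child is finalized before its parent
--     counter = {}
--     for node in reversed(order):
--         total = 1
--         for nxt in adj.get(node, ()):
--             if nxt != parent.get(node):
--                 total += counter.get(nxt, 0)
--         counter[node] = total
--
--     root = counter.get(0, 0)
--     res = []
--     for u, v in edges:
--         m = min(counter.get(u, 0), counter.get(v, 0))
--         res.append(m * (root - m))
--     return res
-- ===== Notes on version B (the rewrite author's own statement) =====
-- stated objective: alternative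
-- what changed: replaces the recursive dfs that mutates a shared Counter by an iterative explicit-stack DFS recording a visitation order and a parent map, then fills the subtree counts in reverse (post) order; adjacency construction and the final per-edge loop stay as in A
-- intended difference: On inputs containing an edge between node 0 and node -1, A's root call dfs(0,-1) treats the real neighbour -1 as the parent sentinel and never descends into it, so A returns 0 paths for such edges (e.g. [(0,-1)] -> [0]); B counts the real subtree hanging off -1 and returns the true path count ([1]), which is the intended value. — e.g. on solve([(0, -1)]): A returns [0], B returns [1]
-- outside the precondition, e.g. on solve([(0, 1), (1, 1)]): A returns [5, 5], B returns [1, 1]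
import Mathlib
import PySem

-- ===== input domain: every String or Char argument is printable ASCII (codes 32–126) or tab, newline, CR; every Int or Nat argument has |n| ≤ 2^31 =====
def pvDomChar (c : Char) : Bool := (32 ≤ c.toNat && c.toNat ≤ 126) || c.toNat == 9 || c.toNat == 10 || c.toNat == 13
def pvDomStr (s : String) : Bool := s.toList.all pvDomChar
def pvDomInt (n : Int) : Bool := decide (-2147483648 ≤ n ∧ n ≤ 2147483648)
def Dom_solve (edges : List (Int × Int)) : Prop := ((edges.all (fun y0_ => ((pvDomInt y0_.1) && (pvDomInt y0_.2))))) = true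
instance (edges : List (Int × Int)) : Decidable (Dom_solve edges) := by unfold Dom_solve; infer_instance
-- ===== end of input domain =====

-- B replaces A's recursive dfs (shared mutable Counter) by an iterative explicit-stack DFS
-- plus a reverse-order accumulation pass: a different decomposition of the same O(V+E) task,
-- not claimed faster.

-- ===== PORT A =====
-- adjMap = defaultdict(set); for u, v in edges: adjMap[u].add(v); adjMap[v].add(u)
def pvAdjA (edges : List (Int × Int)) : PySem.Dict Int (PySem.Set Int) :=
  edges.foldl (fun adjMap p =>
    let adjMap := adjMap.insert p.1 (PySem.Set.add (adjMap.getD p.1 PySem.Set.empty) p.2)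
    adjMap.insert p.2 (PySem.Set.add (adjMap.getD p.2 PySem.Set.empty) p.1))
    PySem.Dict.empty

-- def dfs(cur, parent): counter[cur] += 1; for next in adjMap[cur]: if next != parent:
--   counter[cur] += dfs(next, cur); return counter[cur]
-- (fuel is a totality guard only; with Pre_solve the recursion depth stays below it)
def pvDfsA (adjMap : PySem.Dict Int (PySem.Set Int)) :
    Nat → Int → Int → PySem.Dict Int Int → Int × PySem.Dict Int Int
  | 0, _, _, counter => (0, counter)
  | fuel+1, cur, parent, counter =>
    let counter := counter.modify cur 0 (· + 1)
    let counter := (adjMap.getD cur PySem.Set.empty).foldl (fun counter next =>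
        if next ≠ parent then
          let r := pvDfsA adjMap fuel next cur counter
          r.2.modify cur 0 (· + r.1)
        else counter) counter
    (counter.getD cur 0, counter)

def solve (edges : List (Int × Int)) : List Int :=
  let adjMap := pvAdjA edges
  let counter := (pvDfsA adjMap (2 * edges.length + 2) 0 (-1) PySem.Dict.empty).2
  edges.foldl (fun res p =>
    let min_ := min (counter.getD p.1 0) (counter.getD p.2 0)
    res ++ [min_ * (counter.getD 0 0 - min_)]) []

-- ===== PORT B =====
-- adj = {}; for u, v in edges: adj.setdefault(u, set()).add(v); adj.setdefault(v, set()).add(u)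
def pvAdjB (edges : List (Int × Int)) : PySem.Dict Int (PySem.Set Int) :=
  edges.foldl (fun adj p =>
    let adj := adj.setdefault p.1 PySem.Set.empty
    let adj := adj.insert p.1 (PySem.Set.add (adj.getD p.1 PySem.Set.empty) p.2)
    let adj := adj.setdefault p.2 PySem.Set.empty
    adj.insert p.2 (PySem.Set.add (adj.getD p.2 PySem.Set.empty) p.1))
    PySem.Dict.empty

-- while stack: cur = stack.pop(); order.append(cur); for nxt in adj.get(cur, ()):
--   if nxt not in visited: visited.add(nxt); parent[nxt] = cur; stack.append(nxt)
-- (fuel is a totality guard only: the loop pops once per iteration and pushes each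
--  vertex at most once, so 2*len(edges)+2 iterations always suffice)
def pvLoopB (adj : PySem.Dict Int (PySem.Set Int)) :
    Nat → List Int → PySem.Set Int → List Int → PySem.Dict Int Int →
    List Int × PySem.Set Int × List Int × PySem.Dict Int Int
  | 0, stack, visited, order, parent => (stack, visited, order, parent)
  | fuel+1, stack, visited, order, parent =>
    match PySem.List.pop? stack with
    | none => (stack, visited, order, parent)
    | some (cur, stack) =>
      let order := order ++ [cur]
      let s := (adj.getD cur PySem.Set.empty).foldl
          (fun (s : List Int × PySem.Set Int × PySem.Dict Int Int) nxt =>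
            if PySem.Set.contains s.2.1 nxt then s
            else (s.1 ++ [nxt], PySem.Set.add s.2.1 nxt, s.2.2.insert nxt cur))
          (stack, visited, parent)
      pvLoopB adj fuel s.1 s.2.1 order s.2.2

-- counter = {}; for node in reversed(order): total = 1; for nxt in adj.get(node, ()):
--   if nxt != parent.get(node): total += counter.get(nxt, 0); counter[node] = total
def pvCounterB (adj : PySem.Dict Int (PySem.Set Int)) (parent : PySem.Dict Int Int)
    (order : List Int) : PySem.Dict Int Int :=
  order.reverse.foldl (fun counter node =>
    let total := (adj.getD node PySem.Set.empty).foldl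
        (fun total nxt => if parent.get? node ≠ some nxt then total + counter.getD nxt 0 else total) 1
    counter.insert node total) PySem.Dict.empty

def solve_alt (edges : List (Int × Int)) : List Int :=
  let adj := pvAdjB edges
  let r := pvLoopB adj (2 * edges.length + 2) [0] (PySem.Set.ofList [0]) [] PySem.Dict.empty
  let counter := pvCounterB adj r.2.2.2 r.2.2.1
  let root := counter.getD 0 0
  edges.foldl (fun res p =>
    let m := min (counter.getD p.1 0) (counter.getD p.2 0)
    res ++ [m * (root - m)]) []

-- ===== PRECONDITION & SPEC =====
-- the (deduplicated, undirected) neighbour list of v in the graph described by edges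
def pvNbr (edges : List (Int × Int)) (v : Int) : List Int :=
  (pvAdjA edges).getD v PySem.Set.empty

def pvN (edges : List (Int × Int)) : Nat := 2 * edges.length + 1

-- pvExpand edges k = the vertices at BFS distance ≤ k from vertex 0
def pvExpand (edges : List (Int × Int)) : Nat → PySem.Set Int
  | 0 => PySem.Set.ofList [0]
  | k+1 => PySem.Set.update (pvExpand edges k) ((pvExpand edges k).flatMap (pvNbr edges))

-- BFS distance from vertex 0 (none = unreachable); pvN edges bounds every distance
def pvDist? (edges : List (Int × Int)) (v : Int) : Option Nat :=
  (List.range (pvN edges + 1)).find? (fun k => decide (v ∈ pvExpand edges k))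

-- Pre_solve says the connected component of vertex 0 is a tree: every edge of the
-- component joins consecutive BFS levels and every non-root vertex of the component has
-- exactly one neighbour nearer to 0 (the first conjunct, BFS saturation, always holds and
-- is stated only so the proofs may use it directly).  Pre_ excludes exactly the inputs
-- where A's recursion never returns (a cycle in 0's component, RecursionError) and the
-- inputs with a self-loop inside 0's component, on which A returns but its value depends
-- on Python's set iteration order (e.g. [(0, 1), (1, 1)]).
def Pre_solve (edges : List (Int × Int)) : Prop :=
  pvExpand edges (pvN edges + 1) = pvExpand edges (pvN edges)
  ∧ (∀ v ∈ pvExpand edges (pvN edges), ∀ w ∈ pvNbr edges v,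
      pvDist? edges w = (pvDist? edges v).map (· + 1)
        ∨ pvDist? edges v = (pvDist? edges w).map (· + 1))
  ∧ (∀ v ∈ pvExpand edges (pvN edges), v ≠ 0 →
      ((pvNbr edges v).filter
        (fun w => (pvDist? edges w).map (· + 1) == pvDist? edges v)).length = 1)

instance (edges : List (Int × Int)) : Decidable (Pre_solve edges) := by
  unfold Pre_solve; infer_instance

def pvWitness_solve : (List (Int × Int)) := [(0, 1), (1, 2)]

-- On inputs containing an edge between node 0 and node -1, A's root call dfs(0,-1) treats
-- the real neighbour -1 as the parent sentinel and never descends into it, so A returns 0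
-- paths for such edges; B counts the real subtree hanging off -1, which is intended.
def D_solve (edges : List (Int × Int)) : Prop :=
  ((0 : Int), (-1 : Int)) ∈ edges ∨ ((-1 : Int), (0 : Int)) ∈ edges

instance (edges : List (Int × Int)) : Decidable (D_solve edges) := by
  unfold D_solve; infer_instance

def Spec_solve (edges : List (Int × Int)) (out : List Int) : Prop :=
  ¬ D_solve edges → out = solve_alt edges

instance (edges : List (Int × Int)) (out : List Int) : Decidable (Spec_solve edges out) := by
  unfold Spec_solve; infer_instance

def pvDiffWitness_solve : (List (Int × Int)) := [(0, -1)]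

def pvDiffWitnessOut_solve : (List Int) × (List Int) := ([0], [1])

-- ===== CLAIM (what is proved, stated in full; the proofs are below) =====
def Claim_unchanged_solve : Prop :=
  ∀ (edges : List (Int × Int)), Dom_solve edges → Pre_solve edges → Spec_solve edges (solve edges)

def Claim_changed_solve : Prop :=
  Dom_solve (pvDiffWitness_solve) ∧ Pre_solve (pvDiffWitness_solve) ∧ D_solve (pvDiffWitness_solve)
  ∧ solve (pvDiffWitness_solve) = pvDiffWitnessOut_solve.1
  ∧ solve_alt (pvDiffWitness_solve) = pvDiffWitnessOut_solve.2
  ∧ pvDiffWitnessOut_solve.1 ≠ pvDiffWitnessOut_solve.2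

def Claim_exact_solve : Prop :=
  ∀ (edges : List (Int × Int)), Dom_solve edges → Pre_solve edges → D_solve edges →
    solve edges ≠ solve_alt edges

-- ===== LEMMAS AND PROOFS =====

-- helper notions used only by the proofs
def pvReach (edges : List (Int × Int)) : PySem.Set Int := pvExpand edges (pvN edges)

def pvChildren (edges : List (Int × Int)) (v : Int) : List Int :=
  match pvDist? edges v with
  | some d => (pvNbr edges v).filter (fun w => decide (pvDist? edges w = some (d+1)))
  | none => []

def pvSubF (edges : List (Int × Int)) : Nat → Int → List Int
  | 0, v => [v]
  | f+1, v => v :: (pvChildren edges v).flatMap (pvSubF edges f)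

def pvSubAt (edges : List (Int × Int)) (v : Int) (d : Nat) : List Int :=
  pvSubF edges (pvN edges + 1 - d) v

def pvSizeI (edges : List (Int × Int)) (w : Int) : Int :=
  match pvDist? edges w with
  | some d => ((pvSubAt edges w d).length : Int)
  | none => 0

def pvParent? (edges : List (Int × Int)) (v : Int) : Option Int :=
  match pvDist? edges v with
  | some (d+1) => (pvNbr edges v).find? (fun w => pvDist? edges w == some d)
  | _ => none

def pvAnc (edges : List (Int × Int)) : Nat → Int → Option Int
  | 0, w => some w
  | k+1, w => (pvAnc edges k w).bind (pvParent? edges)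

-- ## adjacency
theorem pv_adj_getD_mem (es : List (Int × Int)) (d0 : PySem.Dict Int (PySem.Set Int)) (v w : Int) :
    (w ∈ (es.foldl (fun adjMap p =>
      let adjMap := adjMap.insert p.1 (PySem.Set.add (adjMap.getD p.1 PySem.Set.empty) p.2)
      adjMap.insert p.2 (PySem.Set.add (adjMap.getD p.2 PySem.Set.empty) p.1)) d0).getD v PySem.Set.empty)
    ↔ (w ∈ d0.getD v PySem.Set.empty ∨ (v, w) ∈ es ∨ (w, v) ∈ es) := by
  induction es generalizing d0 with
  | nil => simp
  | cons e es ih =>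
    rcases e with ⟨a, b⟩
    simp only [List.foldl_cons]
    rw [ih]
    simp only [PySem.Dict.getD_insert, List.mem_cons, Prod.ext_iff]
    split_ifs <;> simp_all [PySem.Set.mem_add] <;> tauto

theorem pv_adj_getD_nodup (es : List (Int × Int)) (d0 : PySem.Dict Int (PySem.Set Int))
    (h0 : ∀ x, (d0.getD x PySem.Set.empty).Nodup) (v : Int) :
    ((es.foldl (fun adjMap p =>
      let adjMap := adjMap.insert p.1 (PySem.Set.add (adjMap.getD p.1 PySem.Set.empty) p.2)
      adjMap.insert p.2 (PySem.Set.add (adjMap.getD p.2 PySem.Set.empty) p.1)) d0).getD v PySem.Set.empty).Nodup := by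
  induction es generalizing d0 with
  | nil => exact h0 v
  | cons e es ih =>
    refine ih _ (fun x => ?_)
    simp only [PySem.Dict.getD_insert]
    split_ifs <;>
      first
        | exact PySem.Set.nodup_add _ _ (PySem.Set.nodup_add _ _ (h0 _))
        | exact PySem.Set.nodup_add _ _ (h0 _)
        | exact h0 _

theorem pv_mem_nbr (edges : List (Int × Int)) (v w : Int) :
    w ∈ pvNbr edges v ↔ (v, w) ∈ edges ∨ (w, v) ∈ edges := by
  have := pv_adj_getD_mem edges PySem.Dict.empty v w
  simpa [pvNbr, pvAdjA, PySem.Dict.getD_empty, PySem.Set.empty] using this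

theorem pv_nbr_nodup (edges : List (Int × Int)) (v : Int) : (pvNbr edges v).Nodup := by
  have := pv_adj_getD_nodup edges PySem.Dict.empty
    (fun x => by simp [PySem.Dict.getD_empty, PySem.Set.empty]) v
  simpa [pvNbr, pvAdjA] using this

theorem pv_nbr_symm (edges : List (Int × Int)) (v w : Int) :
    w ∈ pvNbr edges v ↔ v ∈ pvNbr edges w := by
  simp [pv_mem_nbr]; tauto

-- ## BFS expansion and distance
theorem pv_mem_expand_succ (edges : List (Int × Int)) (k : Nat) (v : Int) :
    v ∈ pvExpand edges (k+1) ↔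
      v ∈ pvExpand edges k ∨ ∃ w ∈ pvExpand edges k, v ∈ pvNbr edges w := by
  simp [pvExpand, PySem.Set.mem_update, List.mem_flatMap]

theorem pv_expand_mono (edges : List (Int × Int)) {k k' : Nat} (h : k ≤ k') {v : Int}
    (hv : v ∈ pvExpand edges k) : v ∈ pvExpand edges k' := by
  induction k' with
  | zero =>
    have hk : k = 0 := by omega
    exact hk ▸ hv
  | succ n ih =>
    rcases Nat.lt_or_ge k (n+1) with h' | h'
    · exact (pv_mem_expand_succ edges n v).mpr (Or.inl (ih (by omega)))
    · have : k = n + 1 := by omega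
      simpa [this] using hv

theorem pv_zero_mem_expand (edges : List (Int × Int)) (k : Nat) :
    (0 : Int) ∈ pvExpand edges k := by
  induction k with
  | zero => simp [pvExpand, PySem.Set.mem_ofList]
  | succ n ih => exact (pv_mem_expand_succ edges n 0).mpr (Or.inl ih)

theorem pv_find?_range (p : Nat → Bool) (n d : Nat) :
    (List.range n).find? p = some d ↔ d < n ∧ p d ∧ ∀ e < d, ¬ p e := by
  induction n generalizing d with
  | zero => simp
  | succ m ih =>
    rw [List.range_succ, List.find?_append]
    rcases hm : (List.range m).find? p with _ | d'
    · have hnone : ∀ e < m, ¬ p e := by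
        intro e he hpe
        have hs : ((List.range m).find? p).isSome := by
          rw [List.find?_isSome]; exact ⟨e, by simpa using he, hpe⟩
        rw [hm] at hs; simp at hs
      simp only [Option.none_or]
      constructor
      · intro h
        have hpm : p m := by
          rcases hx : p m
          · simp [List.find?, hx] at h
          · rfl
        have hdm : m = d := by simpa [List.find?, hpm] using h
        subst hdm
        exact ⟨by omega, hpm, hnone⟩
      · rintro ⟨hdm, hpd, hmin⟩
        have hd : d = m := by
          rcases Nat.lt_or_ge d m with h' | h'
          · exact absurd hpd (hnone d h')
          · omega
        subst hd
        simp [List.find?, hpd]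
    · simp only [Option.some_or]
      rw [ih] at hm
      constructor
      · intro h
        have hd : d' = d := by injection h
        subst hd
        exact ⟨by omega, hm.2.1, hm.2.2⟩
      · rintro ⟨_, hpd, hmin⟩
        have hd : d = d' := by
          rcases Nat.lt_trichotomy d d' with h' | h' | h'
          · exact absurd hpd (hm.2.2 d h')
          · exact h'
          · exact absurd hm.2.1 (hmin d' h')
        simp [hd]

theorem pv_dist?_some_iff (edges : List (Int × Int)) (v : Int) (d : Nat) :
    pvDist? edges v = some d ↔
      d ≤ pvN edges ∧ v ∈ pvExpand edges d ∧ ∀ e < d, v ∉ pvExpand edges e := by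
  unfold pvDist?
  rw [pv_find?_range]
  simp only [decide_eq_true_eq]
  constructor
  · rintro ⟨h1, h2, h3⟩
    exact ⟨by omega, h2, fun e he hmem => h3 e he (by simpa using hmem)⟩
  · rintro ⟨h1, h2, h3⟩
    exact ⟨by omega, h2, fun e he => by simpa using h3 e he⟩

theorem pv_dist?_le (edges : List (Int × Int)) {v : Int} {d : Nat}
    (h : pvDist? edges v = some d) : d ≤ pvN edges :=
  ((pv_dist?_some_iff edges v d).mp h).1

theorem pv_dist?_mem (edges : List (Int × Int)) {v : Int} {d : Nat}
    (h : pvDist? edges v = some d) : v ∈ pvExpand edges d :=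
  ((pv_dist?_some_iff edges v d).mp h).2.1

theorem pv_dist?_min (edges : List (Int × Int)) {v : Int} {d : Nat}
    (h : pvDist? edges v = some d) : ∀ e < d, v ∉ pvExpand edges e :=
  ((pv_dist?_some_iff edges v d).mp h).2.2

theorem pv_mem_reach_iff (edges : List (Int × Int)) (v : Int) :
    v ∈ pvReach edges ↔ ∃ d, pvDist? edges v = some d := by
  constructor
  · intro hv
    have : ((List.range (pvN edges + 1)).find? (fun k => decide (v ∈ pvExpand edges k))).isSome := by
      rw [List.find?_isSome]
      exact ⟨pvN edges, by simp [List.mem_range], by simpa using hv⟩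
    rcases Option.isSome_iff_exists.mp this with ⟨d, hd⟩
    exact ⟨d, hd⟩
  · rintro ⟨d, hd⟩
    exact pv_expand_mono edges (pv_dist?_le edges hd) (pv_dist?_mem edges hd)

theorem pv_dist?_zero (edges : List (Int × Int)) : pvDist? edges 0 = some 0 := by
  rw [pv_dist?_some_iff]
  exact ⟨by omega, by simp [pvExpand, PySem.Set.mem_ofList], fun e he => absurd he (by omega)⟩

theorem pv_dist?_eq_zero (edges : List (Int × Int)) {v : Int}
    (h : pvDist? edges v = some 0) : v = 0 := by
  have := pv_dist?_mem edges h
  simpa [pvExpand, PySem.Set.mem_ofList] using this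

theorem pv_reach_of_dist (edges : List (Int × Int)) {v : Int} {d : Nat}
    (h : pvDist? edges v = some d) : v ∈ pvReach edges :=
  (pv_mem_reach_iff edges v).mpr ⟨d, h⟩


-- ## tree structure of the component of 0 (under Pre_solve)
theorem pv_reach_closed (edges : List (Int × Int))
    (hst : pvExpand edges (pvN edges + 1) = pvExpand edges (pvN edges))
    {v w : Int} (hv : v ∈ pvReach edges) (hw : w ∈ pvNbr edges v) : w ∈ pvReach edges := by
  have h : w ∈ pvExpand edges (pvN edges + 1) :=
    (pv_mem_expand_succ edges (pvN edges) w).mpr (Or.inr ⟨v, hv, hw⟩)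
  rwa [hst] at h

theorem pv_dist_nbr (edges : List (Int × Int)) (hpre : Pre_solve edges)
    {v w : Int} {dv : Nat} (hv : pvDist? edges v = some dv) (hw : w ∈ pvNbr edges v) :
    ∃ dw, pvDist? edges w = some dw ∧ (dw = dv + 1 ∨ dv = dw + 1) := by
  obtain ⟨hst, hlv, _⟩ := hpre
  have hvr : v ∈ pvReach edges := pv_reach_of_dist edges hv
  have hwr : w ∈ pvReach edges := pv_reach_closed edges hst hvr hw
  obtain ⟨dw, hdw⟩ := (pv_mem_reach_iff edges w).mp hwr
  refine ⟨dw, hdw, ?_⟩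
  have h := hlv v hvr w hw
  rw [hv, hdw] at h
  simp only [Option.map_some] at h
  rcases h with h | h
  · left; injection h
  · right; injection h

theorem pv_parent_spec (edges : List (Int × Int)) (hpre : Pre_solve edges) {v : Int} {d : Nat}
    (hv : pvDist? edges v = some (d+1)) :
    ∃ p, pvParent? edges v = some p ∧ p ∈ pvNbr edges v ∧ pvDist? edges p = some d ∧
      ∀ w ∈ pvNbr edges v, pvDist? edges w = some d → w = p := by
  obtain ⟨hst, hlv, huq⟩ := hpre
  have hvr := pv_reach_of_dist edges hv
  have hmemx : v ∈ pvExpand edges (d+1) := pv_dist?_mem edges hv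
  have hnot : v ∉ pvExpand edges d := pv_dist?_min edges hv d (by omega)
  obtain ⟨w0, hw0e, hvw0⟩ : ∃ w ∈ pvExpand edges d, v ∈ pvNbr edges w := by
    rcases (pv_mem_expand_succ edges d v).mp hmemx with h | h
    · exact absurd h hnot
    · exact h
  have hw0 : w0 ∈ pvNbr edges v := (pv_nbr_symm edges v w0).mpr hvw0
  obtain ⟨dw, hdw, hcase⟩ := pv_dist_nbr edges ⟨hst, hlv, huq⟩ hv hw0
  have hdwle : dw ≤ d := by
    by_contra hgt
    exact (pv_dist?_min edges hdw d (by omega)) hw0e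
  have hdwd : dw = d := by rcases hcase with h | h <;> omega
  have hfs : ((pvNbr edges v).find? (fun w => pvDist? edges w == some d)).isSome := by
    rw [List.find?_isSome]
    exact ⟨w0, hw0, by simp [hdw, hdwd]⟩
  obtain ⟨p, hp⟩ := Option.isSome_iff_exists.mp hfs
  have hpmem : p ∈ pvNbr edges v := List.mem_of_find?_eq_some hp
  have hpd : pvDist? edges p = some d := by
    have h := List.find?_some hp
    simpa using h
  have hparent : pvParent? edges v = some p := by
    unfold pvParent?; rw [hv]; exact hp
  refine ⟨p, hparent, hpmem, hpd, ?_⟩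
  intro w hwmem hwd
  have hvne0 : v ≠ 0 := by
    intro h; rw [h, pv_dist?_zero] at hv; simp at hv
  have hlen := huq v hvr hvne0
  obtain ⟨a, ha⟩ := List.length_eq_one_iff.mp hlen
  have hwF : w ∈ (pvNbr edges v).filter
      (fun w => (pvDist? edges w).map (· + 1) == pvDist? edges v) :=
    List.mem_filter.mpr ⟨hwmem, by simp [hwd, hv]⟩
  have hpF : p ∈ (pvNbr edges v).filter
      (fun w => (pvDist? edges w).map (· + 1) == pvDist? edges v) :=
    List.mem_filter.mpr ⟨hpmem, by simp [hpd, hv]⟩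
  rw [ha] at hwF hpF
  simp only [List.mem_singleton] at hwF hpF
  rw [hwF, hpF]

theorem pv_mem_children (edges : List (Int × Int)) {v w : Int} :
    w ∈ pvChildren edges v ↔
      ∃ d, pvDist? edges v = some d ∧ w ∈ pvNbr edges v ∧ pvDist? edges w = some (d+1) := by
  unfold pvChildren
  rcases hv : pvDist? edges v with _ | d
  · simp
  · simp only [List.mem_filter, decide_eq_true_eq]
    constructor
    · rintro ⟨h1, h2⟩; exact ⟨d, rfl, h1, h2⟩
    · rintro ⟨d', hd', h1, h2⟩
      have : d' = d := by injection hd'; omega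
      exact ⟨h1, by rw [h2, this]⟩

theorem pv_children_nodup (edges : List (Int × Int)) (v : Int) :
    (pvChildren edges v).Nodup := by
  unfold pvChildren
  split
  · exact (pv_nbr_nodup edges v).filter _
  · exact List.nodup_nil

theorem pv_filter_ne_parent (edges : List (Int × Int)) (hpre : Pre_solve edges) {v p : Int}
    (hv : v ∈ pvReach edges) (hp : pvParent? edges v = some p) :
    (pvNbr edges v).filter (fun w => decide (w ≠ p)) = pvChildren edges v := by
  obtain ⟨dv, hdv⟩ := (pv_mem_reach_iff edges v).mp hv
  rcases dv with _ | d
  · exfalso; unfold pvParent? at hp; rw [hdv] at hp; simp at hp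
  obtain ⟨p', hp', hpmem, hpd, huniq⟩ := pv_parent_spec edges hpre hdv
  have hpp : p' = p := by rw [hp] at hp'; injection hp' with h2; omega
  subst hpp
  unfold pvChildren
  rw [hdv]
  apply List.filter_congr
  intro w hw
  obtain ⟨dw, hdw, hcase⟩ := pv_dist_nbr edges hpre hdv hw
  rcases hcase with h | h
  · have hne : w ≠ p' := by
      intro he; rw [he, hpd] at hdw; injection hdw with h2; omega
    simp [hne, hdw, h]
  · have hwd : dw = d := by omega
    have hwp : w = p' := huniq w hw (by rw [hdw, hwd])
    have hne2 : ¬ (d = d + 1 + 1) := by omega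
    simp [hwp, hpd, hne2]

theorem pv_neg_one_nbr_zero (edges : List (Int × Int)) :
    ((-1 : Int) ∈ pvNbr edges 0) ↔ D_solve edges := by
  rw [pv_mem_nbr]; unfold D_solve; exact Iff.rfl

theorem pv_nbr_zero_dist (edges : List (Int × Int)) (hpre : Pre_solve edges) {w : Int}
    (hw : w ∈ pvNbr edges 0) : pvDist? edges w = some 1 := by
  obtain ⟨dw, hdw, hcase⟩ := pv_dist_nbr edges hpre (pv_dist?_zero edges) hw
  have h1 : dw = 1 := by rcases hcase with h | h <;> omega
  rw [hdw, h1]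

theorem pv_children_root_eq_nbr (edges : List (Int × Int)) (hpre : Pre_solve edges) :
    pvChildren edges 0 = pvNbr edges 0 := by
  unfold pvChildren
  rw [pv_dist?_zero]
  apply List.filter_eq_self.mpr
  intro w hw
  simp [pv_nbr_zero_dist edges hpre hw]

theorem pv_filter_root (edges : List (Int × Int)) (hpre : Pre_solve edges)
    (hd : ¬ D_solve edges) :
    (pvNbr edges 0).filter (fun w => decide (w ≠ (-1 : Int))) = pvChildren edges 0 := by
  rw [pv_children_root_eq_nbr edges hpre]
  apply List.filter_eq_self.mpr
  intro w hw
  have hwne : w ≠ -1 := by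
    intro he; exact hd ((pv_neg_one_nbr_zero edges).mp (he ▸ hw))
  simp [hwne]

theorem pv_child_parent (edges : List (Int × Int)) (hpre : Pre_solve edges) {v c : Int}
    {d : Nat} (hv : pvDist? edges v = some d) (hc : c ∈ pvChildren edges v) :
    pvParent? edges c = some v := by
  obtain ⟨d', hd', hcn, hcd⟩ := (pv_mem_children edges).mp hc
  have hdd : d' = d := by rw [hv] at hd'; injection hd' with h2; omega
  subst hdd
  obtain ⟨p, hp, _, hpd, huniq⟩ := pv_parent_spec edges hpre hcd
  have hvp : v = p := huniq v ((pv_nbr_symm edges v c).mp hcn) hv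
  rw [hp, hvp]

-- ## subtrees
theorem pv_mem_sub_self (edges : List (Int × Int)) (f : Nat) (v : Int) :
    v ∈ pvSubF edges f v := by
  cases f <;> simp [pvSubF]

theorem pv_sub_dist (edges : List (Int × Int)) (f : Nat) :
    ∀ (v : Int) (d : Nat) (w : Int), pvDist? edges v = some d → w ∈ pvSubF edges f v →
      ∃ dw, pvDist? edges w = some dw ∧ d ≤ dw ∧ (dw = d → w = v) := by
  induction f with
  | zero =>
    intro v d w hv hw
    have hwv : w = v := by simpa [pvSubF] using hw
    subst hwv
    exact ⟨d, hv, le_refl d, fun _ => rfl⟩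
  | succ f ih =>
    intro v d w hv hw
    simp only [pvSubF, List.mem_cons, List.mem_flatMap] at hw
    rcases hw with rfl | ⟨c, hc, hw⟩
    · exact ⟨d, hv, le_refl d, fun _ => rfl⟩
    · obtain ⟨d', hd', _, hcd⟩ := (pv_mem_children edges).mp hc
      have hdd : d' = d := by rw [hv] at hd'; injection hd' with h2; omega
      rw [hdd] at hcd
      obtain ⟨dw, hdw, hle, _⟩ := ih c (d+1) w hcd hw
      exact ⟨dw, hdw, by omega, fun h => absurd h (by omega)⟩

theorem pv_subAt_succ (edges : List (Int × Int)) (c : Int) (d : Nat) :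
    pvSubAt edges c (d+1) = pvSubF edges (pvN edges - d) c := by
  simp [pvSubAt, Nat.succ_sub_succ]

theorem pv_sub_eq (edges : List (Int × Int)) {v : Int} {d : Nat}
    (h : pvDist? edges v = some d) :
    pvSubAt edges v d = v :: (pvChildren edges v).flatMap (fun c => pvSubAt edges c (d+1)) := by
  have hdN : d ≤ pvN edges := pv_dist?_le edges h
  have h1 : pvN edges + 1 - d = (pvN edges - d) + 1 := by omega
  rw [pvSubAt, h1]
  simp only [pvSubF, pv_subAt_succ]

theorem pv_sub_anc (edges : List (Int × Int)) (hpre : Pre_solve edges) :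
    ∀ (f : Nat) (v : Int) (d : Nat),
    pvDist? edges v = some d → pvN edges + 1 - d = f →
    ∀ w ∈ pvSubF edges f v, ∃ dw, pvDist? edges w = some dw ∧ d ≤ dw ∧
      pvAnc edges (dw - d) w = some v := by
  intro f
  induction f with
  | zero =>
    intro v d hv hf
    have hle := pv_dist?_le edges hv
    exact (by omega : False).elim
  | succ f ih =>
    intro v d hv hf w hw
    simp only [pvSubF, List.mem_cons, List.mem_flatMap] at hw
    rcases hw with rfl | ⟨c, hc, hw⟩
    · exact ⟨d, hv, le_refl d, by simp [pvAnc]⟩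
    · obtain ⟨d', hd', hcn, hcd⟩ := (pv_mem_children edges).mp hc
      have hdd : d' = d := by rw [hv] at hd'; injection hd' with h2; omega
      rw [hdd] at hcd
      have hfc : pvN edges + 1 - (d+1) = f := by
        have := pv_dist?_le edges hcd; omega
      obtain ⟨dw, hdw, hle, hanc⟩ := ih c (d+1) hcd hfc w hw
      refine ⟨dw, hdw, by omega, ?_⟩
      have hstep : dw - d = (dw - (d+1)) + 1 := by omega
      rw [hstep]
      simp [pvAnc, hanc, pv_child_parent edges hpre hv hc]

theorem pv_sub_disjoint (edges : List (Int × Int)) (hpre : Pre_solve edges) {c₁ c₂ : Int}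
    {e : Nat} (h1 : pvDist? edges c₁ = some e) (h2 : pvDist? edges c₂ = some e)
    (hne : c₁ ≠ c₂) {w : Int} (hw1 : w ∈ pvSubAt edges c₁ e) : w ∉ pvSubAt edges c₂ e := by
  intro hw2
  obtain ⟨dw, hdw, hle, hanc1⟩ := pv_sub_anc edges hpre _ c₁ e h1 rfl w hw1
  obtain ⟨dw', hdw', _, hanc2⟩ := pv_sub_anc edges hpre _ c₂ e h2 rfl w hw2
  have hdd : dw' = dw := by rw [hdw] at hdw'; injection hdw' with h2; omega
  subst hdd
  rw [hanc1] at hanc2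
  injection hanc2 with h2
  exact hne h2

theorem pv_sub_trans (edges : List (Int × Int)) (_hpre : Pre_solve edges) :
    ∀ (f : Nat) (v : Int) (d : Nat),
    pvDist? edges v = some d → pvN edges + 1 - d = f →
    ∀ u du, pvDist? edges u = some du → u ∈ pvSubF edges f v →
    ∀ w, w ∈ pvSubAt edges u du → w ∈ pvSubAt edges v d := by
  intro f
  induction f with
  | zero =>
    intro v d hv hf
    have hle := pv_dist?_le edges hv
    exact (by omega : False).elim
  | succ f ih =>
    intro v d hv hf u du hu humem w hw
    simp only [pvSubF, List.mem_cons, List.mem_flatMap] at humem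
    rcases humem with rfl | ⟨c, hc, hum⟩
    · have hdd : du = d := by rw [hv] at hu; injection hu with h2; omega
      rw [hdd] at hw
      exact hw
    · obtain ⟨d', hd', hcn, hcd⟩ := (pv_mem_children edges).mp hc
      have hdd : d' = d := by rw [hv] at hd'; injection hd' with h2; omega
      rw [hdd] at hcd
      have hfc : pvN edges + 1 - (d+1) = f := by
        have := pv_dist?_le edges hcd; omega
      have hw' : w ∈ pvSubAt edges c (d+1) := ih c (d+1) hcd hfc u du hu hum w hw
      rw [pv_sub_eq edges hv]
      exact List.mem_cons.mpr (Or.inr (List.mem_flatMap.mpr ⟨c, hc, hw'⟩))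

theorem pv_sub_zero_of_dist (edges : List (Int × Int)) (hpre : Pre_solve edges) :
    ∀ (d : Nat) (w : Int), pvDist? edges w = some d → w ∈ pvSubAt edges 0 0 := by
  intro d
  induction d using Nat.strong_induction_on with
  | _ d ihd =>
    intro w hd
    rcases d with _ | d
    · have hw0 : w = 0 := pv_dist?_eq_zero edges hd
      subst hw0
      exact pv_mem_sub_self edges _ 0
    · obtain ⟨p, hp, hpmem, hpd, _⟩ := pv_parent_spec edges hpre hd
      have hps : p ∈ pvSubAt edges 0 0 := ihd d (by omega) p hpd
      have hwc : w ∈ pvChildren edges p :=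
        (pv_mem_children edges).mpr ⟨d, hpd, (pv_nbr_symm edges w p).mp hpmem, hd⟩
      have hwp : w ∈ pvSubAt edges p d := by
        rw [pv_sub_eq edges hpd]
        exact List.mem_cons.mpr (Or.inr (List.mem_flatMap.mpr
          ⟨w, hwc, pv_mem_sub_self edges _ w⟩))
      exact pv_sub_trans edges hpre _ 0 0 (pv_dist?_zero edges) rfl p d hpd hps w hwp

theorem pv_reach_iff_sub_zero (edges : List (Int × Int)) (hpre : Pre_solve edges) (w : Int) :
    w ∈ pvReach edges ↔ w ∈ pvSubAt edges 0 0 := by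
  constructor
  · intro hw
    obtain ⟨d, hd⟩ := (pv_mem_reach_iff edges w).mp hw
    exact pv_sub_zero_of_dist edges hpre d w hd
  · intro hw
    obtain ⟨dw, hdw, _, _⟩ := pv_sub_dist edges _ 0 0 w (pv_dist?_zero edges) hw
    exact pv_reach_of_dist edges hdw

theorem pv_sizeI_of_dist (edges : List (Int × Int)) {w : Int} {d : Nat}
    (h : pvDist? edges w = some d) :
    pvSizeI edges w = ((pvSubAt edges w d).length : Int) := by
  unfold pvSizeI; rw [h]

theorem pv_sizeI_of_none (edges : List (Int × Int)) {w : Int}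
    (h : pvDist? edges w = none) : pvSizeI edges w = 0 := by
  unfold pvSizeI; rw [h]

-- ## correctness of A's dfs
theorem pv_not_mem_sub_child (edges : List (Int × Int)) {v c : Int} {d : Nat}
    (hv : pvDist? edges v = some d) (hcd : pvDist? edges c = some (d+1)) :
    v ∉ pvSubAt edges c (d+1) := by
  intro hvs
  obtain ⟨dv', hdv', hle, _⟩ := pv_sub_dist edges _ c (d+1) v hcd hvs
  rw [hv] at hdv'
  injection hdv' with h2
  omega

theorem pv_child_dist (edges : List (Int × Int)) {v c : Int} {d : Nat}
    (hv : pvDist? edges v = some d) (hc : c ∈ pvChildren edges v) :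
    pvDist? edges c = some (d+1) := by
  obtain ⟨d', hd', _, hcd⟩ := (pv_mem_children edges).mp hc
  have hdd : d' = d := by rw [hv] at hd'; injection hd' with h2; omega
  rw [hdd] at hcd
  exact hcd

theorem pv_mem_sub_iff (edges : List (Int × Int)) {v : Int} {d : Nat}
    (hv : pvDist? edges v = some d) (w : Int) :
    w ∈ pvSubAt edges v d ↔
      w = v ∨ ∃ c ∈ pvChildren edges v, w ∈ pvSubAt edges c (d+1) := by
  rw [pv_sub_eq edges hv]
  simp [List.mem_flatMap]

theorem pv_sum_cast (cs : List Int) (g : Int → Nat) :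
    ((cs.map (fun c => ((g c : Nat) : Int))).sum) = (((cs.map g).sum : Nat) : Int) := by
  induction cs with
  | nil => simp
  | cons c cs ih => simp [ih]

theorem pv_dfsA_fold (edges : List (Int × Int)) (hpre : Pre_solve edges)
    (f : Nat) (v : Int) (d : Nat) (hv : pvDist? edges v = some d)
    (hrec : ∀ c counter, c ∈ pvChildren edges v →
      (∀ w ∈ pvSubAt edges c (d+1), PySem.Dict.getD counter w 0 = 0) →
      (pvDfsA (pvAdjA edges) f c v counter).1 = ((pvSubAt edges c (d+1)).length : Int)
      ∧ ∀ w, PySem.Dict.getD (pvDfsA (pvAdjA edges) f c v counter).2 w 0 =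
          if w ∈ pvSubAt edges c (d+1) then pvSizeI edges w
          else PySem.Dict.getD counter w 0) :
    ∀ (cs : List Int) (counter : PySem.Dict Int Int),
      (∀ c ∈ cs, c ∈ pvChildren edges v) → cs.Nodup →
      (∀ c ∈ cs, ∀ w ∈ pvSubAt edges c (d+1), PySem.Dict.getD counter w 0 = 0) →
      ∀ w, PySem.Dict.getD
          (cs.foldl (fun counter next =>
            ((pvDfsA (pvAdjA edges) f next v counter).2).modify v 0
              (· + (pvDfsA (pvAdjA edges) f next v counter).1)) counter) w 0 =
        if w = v then PySem.Dict.getD counter v 0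
            + ((cs.map (fun c => ((pvSubAt edges c (d+1)).length : Int))).sum)
        else if ∃ c ∈ cs, w ∈ pvSubAt edges c (d+1) then pvSizeI edges w
        else PySem.Dict.getD counter w 0 := by
  intro cs
  induction cs with
  | nil =>
    intro counter _ _ _ w
    by_cases hwv : w = v <;> simp [hwv]
  | cons c cs ihcs =>
    intro counter hmem hnd hzero w
    simp only [List.foldl_cons]
    have hcch : c ∈ pvChildren edges v := hmem c List.mem_cons_self
    have hcd : pvDist? edges c = some (d+1) := pv_child_dist edges hv hcch
    obtain ⟨hr1, hr2⟩ := hrec c counter hcch (hzero c List.mem_cons_self)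
    have hvnotsub : v ∉ pvSubAt edges c (d+1) := pv_not_mem_sub_child edges hv hcd
    have hgd2 : ∀ x, PySem.Dict.getD
        (((pvDfsA (pvAdjA edges) f c v counter).2).modify v 0
          (· + (pvDfsA (pvAdjA edges) f c v counter).1)) x 0 =
        if x = v then PySem.Dict.getD counter v 0 + ((pvSubAt edges c (d+1)).length : Int)
        else if x ∈ pvSubAt edges c (d+1) then pvSizeI edges x
        else PySem.Dict.getD counter x 0 := by
      intro x
      rw [PySem.Dict.getD_modify]
      by_cases hxv : x = v
      · rw [if_pos hxv, if_pos hxv, hr2 v, if_neg hvnotsub, hr1]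
      · rw [if_neg hxv, if_neg hxv]
        exact hr2 x
    have htail := ihcs (((pvDfsA (pvAdjA edges) f c v counter).2).modify v 0
          (· + (pvDfsA (pvAdjA edges) f c v counter).1))
      (fun c' h => hmem c' (List.mem_cons_of_mem c h))
      (List.nodup_cons.mp hnd).2
      (fun c' hc' w' hw' => by
        rw [hgd2 w']
        have hne : c' ≠ c := by
          rintro rfl; exact (List.nodup_cons.mp hnd).1 hc'
        have hcd' : pvDist? edges c' = some (d+1) :=
          pv_child_dist edges hv (hmem c' (List.mem_cons_of_mem c hc'))
        have hnsub : w' ∉ pvSubAt edges c (d+1) :=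
          pv_sub_disjoint edges hpre hcd' hcd hne hw'
        have hwv' : w' ≠ v := by
          rintro rfl; exact pv_not_mem_sub_child edges hv hcd' hw'
        rw [if_neg hwv', if_neg hnsub]
        exact hzero c' (List.mem_cons_of_mem c hc') w' hw')
    rw [htail w]
    by_cases hwv : w = v
    · subst hwv
      rw [if_pos rfl, if_pos rfl, hgd2 w, if_pos rfl]
      simp only [List.map_cons, List.sum_cons]
      ring
    · rw [if_neg hwv, if_neg hwv]
      by_cases hex : ∃ c' ∈ cs, w ∈ pvSubAt edges c' (d+1)
      · rw [if_pos hex]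
        have hex2 : ∃ c' ∈ c :: cs, w ∈ pvSubAt edges c' (d+1) := by
          obtain ⟨c', h1, h2⟩ := hex
          exact ⟨c', List.mem_cons_of_mem c h1, h2⟩
        rw [if_pos hex2]
      · rw [if_neg hex, hgd2 w, if_neg hwv]
        by_cases hmemc : w ∈ pvSubAt edges c (d+1)
        · rw [if_pos hmemc]
          have hex2 : ∃ c' ∈ c :: cs, w ∈ pvSubAt edges c' (d+1) :=
            ⟨c, List.mem_cons_self, hmemc⟩
          rw [if_pos hex2]
        · rw [if_neg hmemc]
          have hex2 : ¬ ∃ c' ∈ c :: cs, w ∈ pvSubAt edges c' (d+1) := by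
            rintro ⟨c', hc', hw'⟩
            rcases List.mem_cons.mp hc' with rfl | hc'
            · exact hmemc hw'
            · exact hex ⟨c', hc', hw'⟩
          rw [if_neg hex2]

theorem pv_dfsA_spec (edges : List (Int × Int)) (hpre : Pre_solve edges) :
    ∀ (fuel : Nat) (v : Int) (d : Nat) (p : Int) (counter : PySem.Dict Int Int),
    pvDist? edges v = some d → pvN edges + 1 - d ≤ fuel →
    ((pvNbr edges v).filter (fun w => decide (w ≠ p)) = pvChildren edges v) →
    (∀ w ∈ pvSubAt edges v d, PySem.Dict.getD counter w 0 = 0) →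
    (pvDfsA (pvAdjA edges) fuel v p counter).1 = ((pvSubAt edges v d).length : Int)
    ∧ ∀ w, PySem.Dict.getD (pvDfsA (pvAdjA edges) fuel v p counter).2 w 0 =
        if w ∈ pvSubAt edges v d then pvSizeI edges w
        else PySem.Dict.getD counter w 0 := by
  intro fuel
  induction fuel with
  | zero =>
    intro v d p counter hv hf
    have hle := pv_dist?_le edges hv
    exact (by omega : False).elim
  | succ fuel ih =>
    intro v d p counter hv hf hfilt hzero
    have hvsub : v ∈ pvSubAt edges v d := pv_mem_sub_self edges _ v
    -- the recursion hypothesis instantiated for the children of v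
    have hrec : ∀ c counter', c ∈ pvChildren edges v →
        (∀ w ∈ pvSubAt edges c (d+1), PySem.Dict.getD counter' w 0 = 0) →
        (pvDfsA (pvAdjA edges) fuel c v counter').1 = ((pvSubAt edges c (d+1)).length : Int)
        ∧ ∀ w, PySem.Dict.getD (pvDfsA (pvAdjA edges) fuel c v counter').2 w 0 =
            if w ∈ pvSubAt edges c (d+1) then pvSizeI edges w
            else PySem.Dict.getD counter' w 0 := by
      intro c counter' hc hz
      have hcd : pvDist? edges c = some (d+1) := pv_child_dist edges hv hc
      have hfc : pvN edges + 1 - (d+1) ≤ fuel := by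
        have := pv_dist?_le edges hcd; omega
      have hfiltc : (pvNbr edges c).filter (fun w => decide (w ≠ v)) = pvChildren edges c :=
        pv_filter_ne_parent edges hpre (pv_reach_of_dist edges hcd)
          (pv_child_parent edges hpre hv hc)
      exact ih c (d+1) v counter' hcd hfc hfiltc hz
    -- the neighbour loop is the loop over the children
    have hfold : ∀ c0 : PySem.Dict Int Int,
        ((pvNbr edges v).foldl (fun counter next =>
            if next ≠ p then
              let r := pvDfsA (pvAdjA edges) fuel next v counter
              r.2.modify v 0 (· + r.1)
            else counter) c0) =
        ((pvChildren edges v).foldl (fun counter next =>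
            ((pvDfsA (pvAdjA edges) fuel next v counter).2).modify v 0
              (· + (pvDfsA (pvAdjA edges) fuel next v counter).1)) c0) := by
      intro c0
      rw [← hfilt]
      exact PySem.List.foldl_ite_eq_foldl_filter (p := fun next => next ≠ p)
        (f := fun counter next => ((pvDfsA (pvAdjA edges) fuel next v counter).2).modify v 0
          (· + (pvDfsA (pvAdjA edges) fuel next v counter).1)) (pvNbr edges v) c0
    have hz1 : ∀ c ∈ pvChildren edges v, ∀ w ∈ pvSubAt edges c (d+1),
        PySem.Dict.getD (counter.modify v 0 (· + 1)) w 0 = 0 := by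
      intro c hc w hw
      rw [PySem.Dict.getD_modify]
      have hcd := pv_child_dist edges hv hc
      have hwv : w ≠ v := by rintro rfl; exact pv_not_mem_sub_child edges hv hcd hw
      rw [if_neg hwv]
      exact hzero w ((pv_mem_sub_iff edges hv w).mpr (Or.inr ⟨c, hc, hw⟩))
    have hmain := pv_dfsA_fold edges hpre fuel v d hv hrec (pvChildren edges v)
        (counter.modify v 0 (· + 1)) (fun c h => h) (pv_children_nodup edges v) hz1
    have hc1v : PySem.Dict.getD (counter.modify v 0 (· + 1)) v 0 = 1 := by
      rw [PySem.Dict.getD_modify, if_pos rfl, hzero v hvsub]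
      norm_num
    have hlen : ((pvSubAt edges v d).length : Int) =
        1 + ((pvChildren edges v).map
            (fun c => ((pvSubAt edges c (d+1)).length : Int))).sum := by
      rw [pv_sub_eq edges hv]
      simp only [List.length_cons, List.length_flatMap, pv_sum_cast]
      push_cast
      ring
    have h2 : (pvDfsA (pvAdjA edges) (fuel+1) v p counter).2 =
        ((pvNbr edges v).foldl (fun counter next =>
            if next ≠ p then
              let r := pvDfsA (pvAdjA edges) fuel next v counter
              r.2.modify v 0 (· + r.1)
            else counter) (counter.modify v 0 (· + 1))) := rfl
    have h1 : (pvDfsA (pvAdjA edges) (fuel+1) v p counter).1 =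
        PySem.Dict.getD (pvDfsA (pvAdjA edges) (fuel+1) v p counter).2 v 0 := rfl
    constructor
    · rw [h1, h2, hfold, hmain v, if_pos rfl, hc1v, hlen]
    · intro w
      rw [h2, hfold, hmain w]
      by_cases hwv : w = v
      · subst hwv
        rw [if_pos rfl, hc1v, if_pos hvsub, pv_sizeI_of_dist edges hv, hlen]
      · rw [if_neg hwv]
        by_cases hex : ∃ c ∈ pvChildren edges v, w ∈ pvSubAt edges c (d+1)
        · rw [if_pos hex, if_pos ((pv_mem_sub_iff edges hv w).mpr (Or.inr hex))]
        · rw [if_neg hex]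
          have hnsub : w ∉ pvSubAt edges v d := by
            intro hws
            rcases (pv_mem_sub_iff edges hv w).mp hws with h | h
            · exact hwv h
            · exact hex h
          rw [if_neg hnsub, PySem.Dict.getD_modify, if_neg hwv]

-- ## B's adjacency map equals A's
theorem pv_setdefault_insert_step (d : PySem.Dict Int (PySem.Set Int)) (k x : Int) :
    ((d.setdefault k PySem.Set.empty).insert k
      (PySem.Set.add ((d.setdefault k PySem.Set.empty).getD k PySem.Set.empty) x)) =
    d.insert k (PySem.Set.add (d.getD k PySem.Set.empty) x) := by
  cases hc : d.contains k
  · rw [PySem.Dict.setdefault_of_not_contains d _ hc, PySem.Dict.getD_insert_self,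
      PySem.Dict.insert_insert_self, PySem.Dict.getD_of_not_contains d _ hc]
  · rw [PySem.Dict.setdefault_of_contains d _ hc]

theorem pv_adjB_eq (edges : List (Int × Int)) : pvAdjB edges = pvAdjA edges := by
  unfold pvAdjB pvAdjA
  congr 1
  funext adj p
  show ((((adj.setdefault p.1 PySem.Set.empty).insert p.1
      (PySem.Set.add ((adj.setdefault p.1 PySem.Set.empty).getD p.1 PySem.Set.empty) p.2)).setdefault
        p.2 PySem.Set.empty).insert p.2
      (PySem.Set.add ((((adj.setdefault p.1 PySem.Set.empty).insert p.1
        (PySem.Set.add ((adj.setdefault p.1 PySem.Set.empty).getD p.1 PySem.Set.empty) p.2)).setdefault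
          p.2 PySem.Set.empty).getD p.2 PySem.Set.empty) p.1)) = _
  rw [pv_setdefault_insert_step, pv_setdefault_insert_step]

-- ## closed form of B's inner neighbour scan
theorem pv_contains_add_ne (vis : PySem.Set Int) (h x : Int) (hne : x ≠ h) :
    PySem.Set.contains (PySem.Set.add vis h) x = PySem.Set.contains vis x := by
  apply Bool.eq_iff_iff.mpr
  rw [PySem.Set.contains_iff, PySem.Set.contains_iff, PySem.Set.mem_add]
  constructor
  · rintro (hx | hx)
    · exact hx
    · exact absurd hx hne
  · intro hx
    exact Or.inl hx

theorem pv_get?_foldl_insert_const (xs : List Int) (par : PySem.Dict Int Int) (c w : Int) :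
    (xs.foldl (fun d x => d.insert x c) par).get? w = if w ∈ xs then some c else par.get? w := by
  induction xs generalizing par with
  | nil => simp
  | cons x xs ih =>
    simp only [List.foldl_cons, ih, List.mem_cons]
    by_cases hw : w ∈ xs
    · simp [hw]
    · simp [hw, PySem.Dict.get?_insert]

theorem pv_scan_eq (cur : Int) : ∀ (l : List Int), l.Nodup →
    ∀ (st : List Int) (vis : PySem.Set Int) (par : PySem.Dict Int Int),
    (l.foldl (fun (s : List Int × PySem.Set Int × PySem.Dict Int Int) nxt =>
        if PySem.Set.contains s.2.1 nxt then s
        else (s.1 ++ [nxt], PySem.Set.add s.2.1 nxt, s.2.2.insert nxt cur)) (st, vis, par))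
    = (st ++ l.filter (fun x => !(PySem.Set.contains vis x)),
       PySem.Set.update vis (l.filter (fun x => !(PySem.Set.contains vis x))),
       (l.filter (fun x => !(PySem.Set.contains vis x))).foldl (fun d x => d.insert x cur) par) := by
  intro l
  induction l with
  | nil =>
    intro _ st vis par
    simp [PySem.Set.update]
  | cons h t ih =>
    intro hnd st vis par
    obtain ⟨hh, hndt⟩ := List.nodup_cons.mp hnd
    simp only [List.foldl_cons, List.filter_cons]
    cases hc : PySem.Set.contains vis h
    · have hfil : t.filter (fun x => !(PySem.Set.contains (PySem.Set.add vis h) x))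
          = t.filter (fun x => !(PySem.Set.contains vis x)) := by
        apply List.filter_congr
        intro x hx
        have hxh : x ≠ h := fun he => hh (he ▸ hx)
        rw [pv_contains_add_ne vis h x hxh]
      rw [if_neg (by simp)]
      rw [ih hndt (st ++ [h]) (PySem.Set.add vis h) (par.insert h cur), hfil]
      simp only [Bool.not_false, if_true]
      refine congrArg₂ _ ?_ (congrArg₂ _ ?_ ?_)
      · simp
      · rfl
      · rfl
    · rw [if_pos (by simp)]
      rw [ih hndt st vis par]
      simp

-- ## reach cardinality bound
theorem pv_expand_nodup (edges : List (Int × Int)) (k : Nat) : (pvExpand edges k).Nodup := by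
  induction k with
  | zero => exact PySem.Set.nodup_ofList _
  | succ n ih => exact PySem.Set.nodup_update _ _ ih

theorem pv_expand_endpoints (edges : List (Int × Int)) (k : Nat) :
    ∀ v ∈ pvExpand edges k, v ∈ (0 : Int) :: edges.flatMap (fun p => [p.1, p.2]) := by
  induction k with
  | zero =>
    intro v hv
    have : v = 0 := by simpa [pvExpand, PySem.Set.mem_ofList] using hv
    simp [this]
  | succ n ih =>
    intro v hv
    rcases (pv_mem_expand_succ edges n v).mp hv with h | ⟨w, _, hwv⟩
    · exact ih v h
    · rcases (pv_mem_nbr edges w v).mp hwv with h | h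
      · simp only [List.mem_cons, List.mem_flatMap]
        exact Or.inr ⟨(w, v), h, by simp⟩
      · simp only [List.mem_cons, List.mem_flatMap]
        exact Or.inr ⟨(v, w), h, by simp⟩

theorem pv_flatMap_pair_len (edges : List (Int × Int)) :
    (edges.flatMap (fun p => [p.1, p.2])).length = 2 * edges.length := by
  induction edges with
  | nil => simp
  | cons e es ih => simp [ih]; omega

theorem pv_reach_len_le (edges : List (Int × Int)) :
    (pvReach edges).length ≤ 2 * edges.length + 1 := by
  have h := List.Subperm.length_le
    ((pv_expand_nodup edges (pvN edges)).subperm (pv_expand_endpoints edges (pvN edges)))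
  simp only [List.length_cons, pv_flatMap_pair_len] at h
  exact h

-- ## the loop invariant of B's DFS
def pvInv (edges : List (Int × Int)) (st : List Int) (vis : PySem.Set Int)
    (ord : List Int) (par : PySem.Dict Int Int) : Prop :=
  (ord ++ st).Nodup
  ∧ (∀ w : Int, w ∈ vis ↔ w ∈ ord ++ st)
  ∧ (∀ w ∈ vis, w ∈ pvReach edges)
  ∧ ((0 : Int) ∈ vis)
  ∧ par.get? 0 = none
  ∧ (∀ w ∈ st, w = 0 ∨ ∃ p ∈ ord, pvParent? edges w = some p ∧ par.get? w = some p)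
  ∧ (∀ i : Nat, i < ord.length → ord[i]! ≠ 0 →
      ∃ p ∈ ord.take i, pvParent? edges (ord[i]!) = some p ∧ par.get? (ord[i]!) = some p)
  ∧ (∀ x ∈ ord, ∀ w ∈ pvNbr edges x, w ∈ vis)

theorem pv_mem_fresh (edges : List (Int × Int)) (cur : Int) (vis : PySem.Set Int) (x : Int) :
    x ∈ (pvNbr edges cur).filter (fun x => !(PySem.Set.contains vis x)) ↔
      x ∈ pvNbr edges cur ∧ x ∉ vis := by
  rw [List.mem_filter]
  constructor
  · rintro ⟨h1, h2⟩
    refine ⟨h1, fun hx => ?_⟩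
    rw [Bool.not_eq_eq_eq_not] at h2
    rw [(PySem.Set.contains_iff vis x).mpr hx] at h2
    simp at h2
  · rintro ⟨h1, h2⟩
    refine ⟨h1, ?_⟩
    cases hc : PySem.Set.contains vis x
    · rfl
    · exact absurd ((PySem.Set.contains_iff vis x).mp hc) h2

theorem pv_loop_post (edges : List (Int × Int)) (hpre : Pre_solve edges) :
    ∀ (fuel : Nat) (st : List Int) (vis : PySem.Set Int) (ord : List Int)
      (par : PySem.Dict Int Int),
    pvInv edges st vis ord par →
    st.length + ((pvReach edges).length - (ord ++ st).length) < fuel →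
    (pvLoopB (pvAdjA edges) fuel st vis ord par).1 = []
    ∧ pvInv edges (pvLoopB (pvAdjA edges) fuel st vis ord par).1
        (pvLoopB (pvAdjA edges) fuel st vis ord par).2.1
        (pvLoopB (pvAdjA edges) fuel st vis ord par).2.2.1
        (pvLoopB (pvAdjA edges) fuel st vis ord par).2.2.2 := by
  intro fuel
  induction fuel with
  | zero =>
    intro st vis ord par _ hm
    exact absurd hm (by omega)
  | succ fuel ih =>
    intro st vis ord par hinv hm
    obtain ⟨h1, h2, h3, h4, h5, h6, h7, h8⟩ := hinv
    rcases List.eq_nil_or_concat st with rfl | ⟨st', cur, hst⟩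
    · have heq : pvLoopB (pvAdjA edges) (fuel+1) [] vis ord par = ([], vis, ord, par) := rfl
      rw [heq]
      exact ⟨rfl, h1, h2, h3, h4, h5, h6, h7, h8⟩
    · rw [List.concat_eq_append] at hst
      subst hst
      have hpop : PySem.List.pop? (st' ++ [cur]) = some (cur, st') := PySem.List.pop?_last st' cur
      -- abbreviations
      set fresh := (pvNbr edges cur).filter (fun x => !(PySem.Set.contains vis x)) with hfresh
      have hstep : pvLoopB (pvAdjA edges) (fuel+1) (st' ++ [cur]) vis ord par =
          pvLoopB (pvAdjA edges) fuel (st' ++ fresh) (PySem.Set.update vis fresh)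
            (ord ++ [cur]) (fresh.foldl (fun d x => d.insert x cur) par) := by
        show (match PySem.List.pop? (st' ++ [cur]) with
          | none => ((st' ++ [cur]), vis, ord, par)
          | some (cur, stack) =>
            let order := ord ++ [cur]
            let s := ((pvAdjA edges).getD cur PySem.Set.empty).foldl
                (fun (s : List Int × PySem.Set Int × PySem.Dict Int Int) nxt =>
                  if PySem.Set.contains s.2.1 nxt then s
                  else (s.1 ++ [nxt], PySem.Set.add s.2.1 nxt, s.2.2.insert nxt cur))
                (stack, vis, par)
            pvLoopB (pvAdjA edges) fuel s.1 s.2.1 order s.2.2) = _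
        rw [hpop]
        show pvLoopB (pvAdjA edges) fuel _ _ _ _ = _
        rw [pv_scan_eq cur ((pvAdjA edges).getD cur PySem.Set.empty)
          (pv_nbr_nodup edges cur) st' vis par]
        rfl
      rw [hstep]
      -- basic facts about cur and fresh
      have hcurvis : cur ∈ vis := (h2 cur).mpr (by simp)
      have hcurreach : cur ∈ pvReach edges := h3 cur hcurvis
      obtain ⟨dc, hdc⟩ := (pv_mem_reach_iff edges cur).mp hcurreach
      have hfr : ∀ x ∈ fresh, x ∈ pvNbr edges cur ∧ x ∉ vis :=
        fun x hx => (pv_mem_fresh edges cur vis x).mp hx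
      have hfrnd : fresh.Nodup := (pv_nbr_nodup edges cur).filter _
      have hfr2 : ∀ x ∈ fresh, x ≠ 0 ∧ pvDist? edges x = some (dc+1) ∧
          pvParent? edges x = some cur := by
        intro x hx
        obtain ⟨hxn, hxv⟩ := hfr x hx
        have hx0 : x ≠ 0 := fun h => hxv (h ▸ h4)
        obtain ⟨dx, hdx, hcase⟩ := pv_dist_nbr edges hpre hdc hxn
        have hdx1 : dx = dc + 1 := by
          rcases hcase with h | h
          · exact h
          · exfalso
            -- x would be cur's parent, which is already visited
            have hdc' : pvDist? edges cur = some (dx+1) := by rw [hdc, h]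
            obtain ⟨p', hp', hpmem', hpd', huniq'⟩ := pv_parent_spec edges hpre hdc'
            have hxp : x = p' := huniq' x hxn hdx
            have hcur0 : cur ≠ 0 := by
              intro hcz; rw [hcz, pv_dist?_zero] at hdc; injection hdc with h2; omega
            rcases h6 cur (by simp) with hcz | ⟨p, hpord, hppar, _⟩
            · exact hcur0 hcz
            · have hpp : p' = p := by rw [hppar] at hp'; injection hp' with h2; omega
              have : x ∈ vis := (h2 x).mpr (by
                rw [hxp, hpp]
                exact List.mem_append.mpr (Or.inl hpord))
              exact hxv this
        rw [hdx1] at hdx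
        obtain ⟨p'', hp'', _, hpd'', huniq''⟩ := pv_parent_spec edges hpre hdx
        have hcp : cur = p'' := huniq'' cur ((pv_nbr_symm edges cur x).mp hxn) hdc
        exact ⟨hx0, hdx, by rw [hp'', ← hcp]⟩
      -- every visited vertex stays off fresh
      have hvis_not_fresh : ∀ x : Int, x ∈ vis → x ∉ fresh :=
        fun x hx hxf => (hfr x hxf).2 hx
      have hpar2 : ∀ w : Int, (fresh.foldl (fun d x => d.insert x cur) par).get? w =
          if w ∈ fresh then some cur else par.get? w :=
        fun w => pv_get?_foldl_insert_const fresh par cur w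
      -- the new invariant
      have hperm : (ord ++ (st' ++ [cur])).Perm ((ord ++ [cur]) ++ st') := by
        have h' : (st' ++ [cur]).Perm ([cur] ++ st') := List.perm_append_comm
        have h'' := List.Perm.append_left ord h'
        simpa [List.append_assoc] using h''
      have hnodup2 : ((ord ++ [cur]) ++ (st' ++ fresh)).Nodup := by
        have hn1 : ((ord ++ [cur]) ++ st').Nodup := hperm.nodup h1
        rw [show (ord ++ [cur]) ++ (st' ++ fresh) = ((ord ++ [cur]) ++ st') ++ fresh from
          (List.append_assoc _ _ _).symm]
        apply List.nodup_append.mpr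
        refine ⟨hn1, hfrnd, ?_⟩
        intro a ha b hb hab
        subst hab
        have hav : a ∈ vis := (h2 a).mpr (hperm.mem_iff.mpr ha)
        exact (hfr a hb).2 hav
      have hmem2 : ∀ w : Int, w ∈ PySem.Set.update vis fresh ↔
          w ∈ (ord ++ [cur]) ++ (st' ++ fresh) := by
        intro w
        rw [PySem.Set.mem_update, h2 w]
        simp only [List.mem_append, List.mem_singleton]
        tauto
      have hsub2 : ∀ w ∈ PySem.Set.update vis fresh, w ∈ pvReach edges := by
        intro w hw
        rcases (PySem.Set.mem_update vis fresh w).mp hw with h | h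
        · exact h3 w h
        · exact pv_reach_closed edges hpre.1 hcurreach (hfr w h).1
      have h02 : (0 : Int) ∈ PySem.Set.update vis fresh :=
        (PySem.Set.mem_update vis fresh 0).mpr (Or.inl h4)
      have hpar02 : (fresh.foldl (fun d x => d.insert x cur) par).get? 0 = none := by
        rw [hpar2 0, if_neg (fun h => (hfr2 0 h).1 rfl)]
        exact h5
      have hst2 : ∀ w ∈ st' ++ fresh, w = 0 ∨ ∃ p ∈ ord ++ [cur],
          pvParent? edges w = some p ∧
          (fresh.foldl (fun d x => d.insert x cur) par).get? w = some p := by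
        intro w hw
        rcases List.mem_append.mp hw with hw | hw
        · rcases h6 w (List.mem_append.mpr (Or.inl hw)) with h | ⟨p, hpord, hppar, hpget⟩
          · exact Or.inl h
          · refine Or.inr ⟨p, List.mem_append.mpr (Or.inl hpord), hppar, ?_⟩
            rw [hpar2 w, if_neg, hpget]
            exact hvis_not_fresh w ((h2 w).mpr (by simp [hw]))
        · obtain ⟨_, _, hpw⟩ := hfr2 w hw
          exact Or.inr ⟨cur, by simp, hpw, by rw [hpar2 w, if_pos hw]⟩
      have hpos2 : ∀ i : Nat, i < (ord ++ [cur]).length → (ord ++ [cur])[i]! ≠ 0 →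
          ∃ p ∈ (ord ++ [cur]).take i, pvParent? edges ((ord ++ [cur])[i]!) = some p ∧
            (fresh.foldl (fun d x => d.insert x cur) par).get? ((ord ++ [cur])[i]!) = some p := by
        intro i hi hne
        rcases Nat.lt_or_ge i ord.length with hil | hig
        · have hgi : (ord ++ [cur])[i]! = ord[i]! := by
            rw [getElem!_pos (ord ++ [cur]) i (by simp; omega),
              getElem!_pos ord i hil, List.getElem_append_left hil]
          rw [hgi] at hne ⊢
          obtain ⟨p, hp, hppar, hpget⟩ := h7 i hil hne
          have htk : (ord ++ [cur]).take i = ord.take i := by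
            rw [List.take_append, show i - ord.length = 0 by omega, List.take_zero,
              List.append_nil]
          refine ⟨p, by rw [htk]; exact hp, hppar, ?_⟩
          have hpv : ord[i]! ∉ fresh := hvis_not_fresh _ ((h2 _).mpr
            (List.mem_append.mpr (Or.inl (by
              rw [getElem!_pos ord i hil]; exact List.getElem_mem _))))
          rw [hpar2 _, if_neg hpv, hpget]
        · have hieq : i = ord.length := by
            simp only [List.length_append, List.length_singleton] at hi; omega
          have hgi : (ord ++ [cur])[i]! = cur := by
            rw [getElem!_pos (ord ++ [cur]) i (by simp; omega)]
            subst hieq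
            simp
          rw [hgi] at hne ⊢
          rcases h6 cur (by simp) with hcz | ⟨p, hpord, hppar, hpget⟩
          · exact absurd hcz hne
          · have htk : (ord ++ [cur]).take i = ord := by rw [hieq, List.take_left]
            refine ⟨p, by rw [htk]; exact hpord, hppar, ?_⟩
            have hcv : cur ∉ fresh := hvis_not_fresh cur hcurvis
            rw [hpar2 _, if_neg hcv, hpget]
      have hlast2 : ∀ x ∈ ord ++ [cur], ∀ w ∈ pvNbr edges x,
          w ∈ PySem.Set.update vis fresh := by
        intro x hx w hw
        rcases List.mem_append.mp hx with hx | hx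
        · exact (PySem.Set.mem_update _ _ _).mpr (Or.inl (h8 x hx w hw))
        · have hxc : x = cur := by simpa using hx
          subst hxc
          by_cases hwv : w ∈ vis
          · exact (PySem.Set.mem_update _ _ _).mpr (Or.inl hwv)
          · exact (PySem.Set.mem_update _ _ _).mpr
              (Or.inr ((pv_mem_fresh edges x vis w).mpr ⟨hw, hwv⟩))
      have hlen2 : ((ord ++ [cur]) ++ (st' ++ fresh)).length ≤ (pvReach edges).length := by
        apply List.Subperm.length_le
        apply hnodup2.subperm
        intro a ha
        exact hsub2 a ((hmem2 a).mpr ha)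
      have hm2 : (st' ++ fresh).length +
          ((pvReach edges).length - ((ord ++ [cur]) ++ (st' ++ fresh)).length) < fuel := by
        simp only [List.length_append, List.length_singleton] at hm hlen2 ⊢
        omega
      exact ih (st' ++ fresh) (PySem.Set.update vis fresh) (ord ++ [cur])
        (fresh.foldl (fun d x => d.insert x cur) par)
        ⟨hnodup2, hmem2, hsub2, h02, hpar02, hst2, hpos2, hlast2⟩ hm2

-- ## after the loop: the order lists exactly the component, parents before children
theorem pv_ord_complete (edges : List (Int × Int)) (hpre : Pre_solve edges)
    (vis : PySem.Set Int) (ord : List Int) (par : PySem.Dict Int Int)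
    (hinv : pvInv edges [] vis ord par) : ∀ d w, pvDist? edges w = some d → w ∈ ord := by
  obtain ⟨h1, h2, h3, h4, h5, h6, h7, h8⟩ := hinv
  intro d
  induction d using Nat.strong_induction_on with
  | _ d ihd =>
    intro w hd
    rcases d with _ | d
    · have hw0 : w = 0 := pv_dist?_eq_zero edges hd
      subst hw0
      simpa using (h2 0).mp h4
    · obtain ⟨p, hp, hpmem, hpd, _⟩ := pv_parent_spec edges hpre hd
      have hpord : p ∈ ord := ihd d (by omega) p hpd
      have hwv : w ∈ vis := h8 p hpord w ((pv_nbr_symm edges w p).mp hpmem)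
      simpa using (h2 w).mp hwv

-- ## the reverse-order accumulation computes the subtree sizes
theorem pv_counterB_spec (edges : List (Int × Int)) (hpre : Pre_solve edges)
    (ord : List Int) (par : PySem.Dict Int Int)
    (hnd : ord.Nodup)
    (hmem : ∀ w : Int, w ∈ ord ↔ w ∈ pvReach edges)
    (hpos : ∀ i : Nat, i < ord.length → ord[i]! ≠ 0 →
      ∃ p ∈ ord.take i, pvParent? edges (ord[i]!) = some p ∧ par.get? (ord[i]!) = some p)
    (hp0 : par.get? 0 = none) :
    ∀ w : Int, PySem.Dict.getD (pvCounterB (pvAdjA edges) par ord) w 0 = pvSizeI edges w := by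
  suffices h : ∀ (suf done : List Int) (cc : PySem.Dict Int Int),
      done ++ suf = ord.reverse →
      (∀ w : Int, PySem.Dict.getD cc w 0 = if w ∈ done then pvSizeI edges w else 0) →
      ∀ w : Int, PySem.Dict.getD (suf.foldl (fun counter node =>
        counter.insert node (((pvAdjA edges).getD node PySem.Set.empty).foldl
          (fun total nxt => if par.get? node ≠ some nxt then total + counter.getD nxt 0
            else total) 1)) cc) w 0
        = if w ∈ done ++ suf then pvSizeI edges w else 0 by
    intro w
    have hres := h ord.reverse [] PySem.Dict.empty (by simp)
      (fun w' => by simp [PySem.Dict.getD_empty]) w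
    have hcounter : pvCounterB (pvAdjA edges) par ord = ord.reverse.foldl
        (fun counter node =>
          counter.insert node (((pvAdjA edges).getD node PySem.Set.empty).foldl
            (fun total nxt => if par.get? node ≠ some nxt then total + counter.getD nxt 0
              else total) 1)) PySem.Dict.empty := rfl
    rw [hcounter, hres]
    by_cases hw : w ∈ pvReach edges
    · rw [if_pos (by simpa using (hmem w).mpr hw)]
    · rw [if_neg (by simpa using fun hin => hw ((hmem w).mp hin))]
      rcases hd : pvDist? edges w with _ | d
      · rw [pv_sizeI_of_none edges hd]
      · exact absurd (pv_reach_of_dist edges hd) hw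
  intro suf
  induction suf with
  | nil =>
    intro done cc hsplit hcc w
    simpa using hcc w
  | cons v suf ihs =>
    intro done cc hsplit hcc w
    simp only [List.foldl_cons]
    have hvrev : v ∈ ord.reverse := by rw [← hsplit]; simp
    have hvord : v ∈ ord := List.mem_reverse.mp hvrev
    have hvreach : v ∈ pvReach edges := (hmem v).mp hvord
    obtain ⟨dv, hdv⟩ := (pv_mem_reach_iff edges v).mp hvreach
    -- the filtered neighbour loop is the loop over the children
    have hfeq : (pvNbr edges v).filter (fun x => decide (par.get? v ≠ some x))
        = pvChildren edges v := by
      by_cases hv0 : v = 0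
      · subst hv0
        rw [hp0, pv_children_root_eq_nbr edges hpre]
        apply List.filter_eq_self.mpr
        intro a _
        simp
      · obtain ⟨i, hi, hgi⟩ := List.getElem_of_mem hvord
        have hgi! : ord[i]! = v := by rw [getElem!_pos ord i hi, hgi]
        obtain ⟨p, hptake, hppar, hpget⟩ := hpos i hi (by rw [hgi!]; exact hv0)
        rw [hgi!] at hppar hpget
        rw [hpget]
        have hcongr : (pvNbr edges v).filter (fun x => decide (¬ some p = some x))
            = (pvNbr edges v).filter (fun x => decide (x ≠ p)) := by
          apply List.filter_congr
          intro x _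
          rw [decide_eq_decide]
          simp [eq_comm]
        rw [show (fun x => decide (some p ≠ some x)) = (fun x => decide (¬ some p = some x))
          from rfl, hcongr]
        exact pv_filter_ne_parent edges hpre hvreach hppar
    have hfilter : ((pvAdjA edges).getD v PySem.Set.empty).foldl
        (fun total nxt => if par.get? v ≠ some nxt then total + cc.getD nxt 0 else total) 1
        = 1 + ((pvChildren edges v).map (fun c => PySem.Dict.getD cc c 0)).sum := by
      rw [show ((pvAdjA edges).getD v PySem.Set.empty) = pvNbr edges v from rfl]
      rw [PySem.List.foldl_ite_eq_foldl_filter (p := fun nxt => par.get? v ≠ some nxt)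
        (f := fun total nxt => total + cc.getD nxt 0) (pvNbr edges v) 1]
      rw [hfeq]
      exact PySem.List.foldl_add (pvChildren edges v) (fun c => cc.getD c 0) 1
    -- every child of v is already processed
    have hordeq : ord = suf.reverse ++ v :: done.reverse := by
      have hrev := congrArg List.reverse hsplit
      simpa [List.reverse_append] using hrev.symm
    have hddone : ∀ c ∈ pvChildren edges v, c ∈ done := by
      intro c hc
      have hcd : pvDist? edges c = some (dv+1) := pv_child_dist edges hdv hc
      have hcord : c ∈ ord := (hmem c).mpr (pv_reach_of_dist edges hcd)
      have hcv : c ≠ v := by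
        intro he; rw [he, hdv] at hcd; injection hcd with h2; omega
      rw [hordeq] at hcord
      rcases List.mem_append.mp hcord with hcs | hcs
      · exfalso
        obtain ⟨j, hj, hgj⟩ := List.getElem_of_mem hcs
        have hjord : j < ord.length := by
          rw [hordeq]
          simp only [List.length_append, List.length_cons, List.length_reverse]
          simp only [List.length_reverse] at hj
          omega
        have hgj! : ord[j]! = c := by
          rw [getElem!_pos ord j hjord]
          rw [show ord[j]'hjord = (suf.reverse ++ v :: done.reverse)[j]'(by rw [← hordeq]; exact hjord) from by congr 1]
          rw [List.getElem_append_left hj]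
          exact hgj
        have hc0 : c ≠ 0 := by
          intro he; rw [he, pv_dist?_zero] at hcd; injection hcd with h2; omega
        obtain ⟨p, hptake, hppar, _⟩ := hpos j hjord (by rw [hgj!]; exact hc0)
        rw [hgj!] at hppar
        have hpv : p = v := by
          have hcp := pv_child_parent edges hpre hdv hc
          rw [hcp] at hppar; injection hppar with h2; omega
        have hvtake : p ∈ ord.take j := hptake
        have hvin : p ∈ suf.reverse := by
          have htkeq : ord.take j = (suf.reverse).take j := by
            rw [hordeq, List.take_append, show j - suf.reverse.length = 0 by
                simp only [List.length_reverse] at hj ⊢; omega,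
              List.take_zero, List.append_nil]
          rw [htkeq] at hvtake
          exact List.mem_of_mem_take hvtake
        have hndo : (suf.reverse ++ v :: done.reverse).Nodup := by rw [← hordeq]; exact hnd
        obtain ⟨_, _, hdisj⟩ := List.nodup_append.mp hndo
        exact hdisj p hvin p (by simp [hpv]) rfl
      · rcases List.mem_cons.mp hcs with he | hcs2
        · exact absurd he hcv
        · exact List.mem_reverse.mp hcs2
    -- the computed total is the subtree size of v
    have htot : 1 + ((pvChildren edges v).map (fun c => PySem.Dict.getD cc c 0)).sum
        = pvSizeI edges v := by
      rw [pv_sizeI_of_dist edges hdv, pv_sub_eq edges hdv]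
      have hmapeq : (pvChildren edges v).map (fun c => PySem.Dict.getD cc c 0)
          = (pvChildren edges v).map
              (fun c => ((pvSubAt edges c (dv+1)).length : Int)) := by
        apply List.map_congr_left
        intro c hc
        rw [hcc c, if_pos (hddone c hc)]
        rw [pv_sizeI_of_dist edges (pv_child_dist edges hdv hc)]
      rw [hmapeq]
      simp only [List.length_cons, List.length_flatMap, pv_sum_cast]
      push_cast
      ring
    have hvnotdone : v ∉ done := by
      have hndr : (done ++ v :: suf).Nodup := by
        rw [hsplit]; exact List.nodup_reverse.mpr hnd
      obtain ⟨_, _, hdisj⟩ := List.nodup_append.mp hndr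
      intro hv
      exact hdisj v hv v (by simp) rfl
    have hccnew : ∀ w' : Int, PySem.Dict.getD (cc.insert v
        (((pvAdjA edges).getD v PySem.Set.empty).foldl
          (fun total nxt => if par.get? v ≠ some nxt then total + cc.getD nxt 0
            else total) 1)) w' 0
        = if w' ∈ done ++ [v] then pvSizeI edges w' else 0 := by
      intro w'
      rw [PySem.Dict.getD_insert]
      by_cases hwv : w' = v
      · rw [if_pos hwv, if_pos (by simp [hwv]), hfilter, htot, hwv]
      · rw [if_neg hwv, hcc w']
        by_cases hwd : w' ∈ done
        · rw [if_pos hwd, if_pos (by simp [hwd])]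
        · rw [if_neg hwd, if_neg (by simp [hwd, hwv])]
    have hres := ihs (done ++ [v]) (cc.insert v
        (((pvAdjA edges).getD v PySem.Set.empty).foldl
          (fun total nxt => if par.get? v ≠ some nxt then total + cc.getD nxt 0
            else total) 1))
      (by rw [List.append_assoc]; simpa using hsplit) hccnew w
    rw [hres]
    by_cases hw : w ∈ done ++ [v] ++ suf
    · rw [if_pos hw, if_pos (by simpa [List.mem_append, or_assoc] using hw)]
    · rw [if_neg hw, if_neg (by simpa [List.mem_append, or_assoc] using hw)]

-- ## named counters of the two ports and their values
def pvCntA (edges : List (Int × Int)) : PySem.Dict Int Int :=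
  (pvDfsA (pvAdjA edges) (2 * edges.length + 2) 0 (-1) PySem.Dict.empty).2

def pvCntB (edges : List (Int × Int)) : PySem.Dict Int Int :=
  pvCounterB (pvAdjA edges)
    (pvLoopB (pvAdjA edges) (2 * edges.length + 2) [0] (PySem.Set.ofList [0]) []
      PySem.Dict.empty).2.2.2
    (pvLoopB (pvAdjA edges) (2 * edges.length + 2) [0] (PySem.Set.ofList [0]) []
      PySem.Dict.empty).2.2.1

theorem pv_solve_map (edges : List (Int × Int)) : solve edges = edges.map (fun p =>
    min (PySem.Dict.getD (pvCntA edges) p.1 0) (PySem.Dict.getD (pvCntA edges) p.2 0)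
      * (PySem.Dict.getD (pvCntA edges) 0 0
        - min (PySem.Dict.getD (pvCntA edges) p.1 0) (PySem.Dict.getD (pvCntA edges) p.2 0))) := by
  show (edges.foldl (fun res p =>
      let min_ := min (PySem.Dict.getD (pvCntA edges) p.1 0) (PySem.Dict.getD (pvCntA edges) p.2 0)
      res ++ [min_ * (PySem.Dict.getD (pvCntA edges) 0 0 - min_)]) []) = _
  rw [PySem.List.foldl_append_singleton_eq_map]
  simp

theorem pv_solve_alt_map (edges : List (Int × Int)) : solve_alt edges = edges.map (fun p =>
    min (PySem.Dict.getD (pvCntB edges) p.1 0) (PySem.Dict.getD (pvCntB edges) p.2 0)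
      * (PySem.Dict.getD (pvCntB edges) 0 0
        - min (PySem.Dict.getD (pvCntB edges) p.1 0) (PySem.Dict.getD (pvCntB edges) p.2 0))) := by
  have hB : pvAdjB edges = pvAdjA edges := pv_adjB_eq edges
  show (edges.foldl (fun res p =>
      let m := min
        (PySem.Dict.getD (pvCounterB (pvAdjB edges)
          (pvLoopB (pvAdjB edges) (2 * edges.length + 2) [0] (PySem.Set.ofList [0]) []
            PySem.Dict.empty).2.2.2
          (pvLoopB (pvAdjB edges) (2 * edges.length + 2) [0] (PySem.Set.ofList [0]) []
            PySem.Dict.empty).2.2.1) p.1 0)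
        (PySem.Dict.getD (pvCounterB (pvAdjB edges)
          (pvLoopB (pvAdjB edges) (2 * edges.length + 2) [0] (PySem.Set.ofList [0]) []
            PySem.Dict.empty).2.2.2
          (pvLoopB (pvAdjB edges) (2 * edges.length + 2) [0] (PySem.Set.ofList [0]) []
            PySem.Dict.empty).2.2.1) p.2 0)
      res ++ [m * (PySem.Dict.getD (pvCounterB (pvAdjB edges)
          (pvLoopB (pvAdjB edges) (2 * edges.length + 2) [0] (PySem.Set.ofList [0]) []
            PySem.Dict.empty).2.2.2
          (pvLoopB (pvAdjB edges) (2 * edges.length + 2) [0] (PySem.Set.ofList [0]) []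
            PySem.Dict.empty).2.2.1) 0 0 - m)]) []) = _
  rw [hB]
  rw [PySem.List.foldl_append_singleton_eq_map]
  simp [pvCntB]

theorem pv_B_val (edges : List (Int × Int)) (hpre : Pre_solve edges) :
    ∀ w : Int, PySem.Dict.getD (pvCntB edges) w 0 = pvSizeI edges w := by
  have hinv0 : pvInv edges [0] (PySem.Set.ofList [0]) [] PySem.Dict.empty := by
    refine ⟨by simp, ?_, ?_, ?_, PySem.Dict.get?_empty 0, ?_, ?_, ?_⟩
    · intro w; rw [PySem.Set.mem_ofList]; simp
    · intro w hw
      have hw0 : w = 0 := by simpa [PySem.Set.mem_ofList] using hw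
      subst hw0; exact pv_zero_mem_expand edges (pvN edges)
    · rw [PySem.Set.mem_ofList]; simp
    · intro w hw; left; simpa using hw
    · intro i hi; simp at hi
    · intro x hx; simp at hx
  have hm0 : ([0] : List Int).length +
      ((pvReach edges).length - (([] : List Int) ++ [0]).length) < 2 * edges.length + 2 := by
    have hle := pv_reach_len_le edges
    simp only [List.length_singleton, List.nil_append]
    omega
  obtain ⟨hstack, hinvf⟩ := pv_loop_post edges hpre (2 * edges.length + 2) [0]
    (PySem.Set.ofList [0]) [] PySem.Dict.empty hinv0 hm0
  rw [hstack] at hinvf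
  obtain ⟨hnd', hmem', hsub', h0', hp0', -, hpos', hnbrs'⟩ := hinvf
  set r := pvLoopB (pvAdjA edges) (2 * edges.length + 2) [0] (PySem.Set.ofList [0]) []
    PySem.Dict.empty with hr
  have hndord : r.2.2.1.Nodup := by simpa using hnd'
  have hmemord : ∀ w : Int, w ∈ r.2.2.1 ↔ w ∈ pvReach edges := by
    intro w
    constructor
    · intro hw; exact hsub' w ((hmem' w).mpr (by simpa using hw))
    · intro hw
      obtain ⟨d, hdw⟩ := (pv_mem_reach_iff edges w).mp hw
      exact pv_ord_complete edges hpre r.2.1 r.2.2.1 r.2.2.2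
        ⟨hnd', hmem', hsub', h0', hp0', by simp, hpos', hnbrs'⟩ d w hdw
  exact pv_counterB_spec edges hpre r.2.2.1 r.2.2.2 hndord hmemord hpos' hp0'

theorem pv_A_val (edges : List (Int × Int)) (hpre : Pre_solve edges) (hd : ¬ D_solve edges) :
    ∀ w : Int, PySem.Dict.getD (pvCntA edges) w 0 = pvSizeI edges w := by
  obtain ⟨-, hAc⟩ := pv_dfsA_spec edges hpre (2 * edges.length + 2) 0 0 (-1) PySem.Dict.empty
    (pv_dist?_zero edges) (by unfold pvN; omega) (pv_filter_root edges hpre hd)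
    (fun w _ => PySem.Dict.getD_empty w 0)
  intro w
  rw [show PySem.Dict.getD (pvCntA edges) w 0 = PySem.Dict.getD
    (pvDfsA (pvAdjA edges) (2 * edges.length + 2) 0 (-1) PySem.Dict.empty).2 w 0 from rfl, hAc w]
  by_cases hw : w ∈ pvSubAt edges 0 0
  · rw [if_pos hw]
  · rw [if_neg hw, PySem.Dict.getD_empty]
    have hnr : w ∉ pvReach edges := fun hr => hw ((pv_reach_iff_sub_zero edges hpre w).mp hr)
    rcases hdw : pvDist? edges w with _ | d
    · rw [pv_sizeI_of_none edges hdw]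
    · exact absurd (pv_reach_of_dist edges hdw) hnr

theorem pv_main (edges : List (Int × Int)) (hpre : Pre_solve edges) (hd : ¬ D_solve edges) :
    solve edges = solve_alt edges := by
  rw [pv_solve_map, pv_solve_alt_map]
  apply List.map_congr_left
  intro p _
  rw [pv_A_val edges hpre hd p.1, pv_A_val edges hpre hd p.2, pv_A_val edges hpre hd 0,
    pv_B_val edges hpre p.1, pv_B_val edges hpre p.2, pv_B_val edges hpre 0]

-- ## A never touches the key -1 (needed for the difference region)
theorem pv_dfsA_nonneg (edges : List (Int × Int)) :
    ∀ (fuel : Nat) (cur parent : Int) (counter : PySem.Dict Int Int),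
    (∀ k : Int, 0 ≤ PySem.Dict.getD counter k 0) →
    0 ≤ (pvDfsA (pvAdjA edges) fuel cur parent counter).1
    ∧ ∀ k : Int, 0 ≤ PySem.Dict.getD (pvDfsA (pvAdjA edges) fuel cur parent counter).2 k 0 := by
  intro fuel
  induction fuel with
  | zero => intro cur parent counter hc; exact ⟨le_refl 0, hc⟩
  | succ fuel ih =>
    intro cur parent counter hc
    have hc1 : ∀ k : Int, 0 ≤ PySem.Dict.getD (counter.modify cur 0 (· + 1)) k 0 := by
      intro k
      rw [PySem.Dict.getD_modify]
      split_ifs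
      · have := hc cur; omega
      · exact hc k
    have hfold : ∀ (L : List Int) (c : PySem.Dict Int Int),
        (∀ k : Int, 0 ≤ PySem.Dict.getD c k 0) →
        ∀ k : Int, 0 ≤ PySem.Dict.getD (L.foldl (fun counter next =>
          if next ≠ parent then
            let r := pvDfsA (pvAdjA edges) fuel next cur counter
            r.2.modify cur 0 (· + r.1)
          else counter) c) k 0 := by
      intro L
      induction L with
      | nil => intro c hcc k; exact hcc k
      | cons x L ihL =>
        intro c hcc k
        simp only [List.foldl_cons]
        by_cases hx : x ≠ parent
        · rw [if_pos hx]
          apply ihL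
          intro k'
          obtain ⟨hr1, hr2⟩ := ih x cur c hcc
          rw [PySem.Dict.getD_modify]
          split_ifs
          · have := hr2 cur; omega
          · exact hr2 k'
        · rw [if_neg hx]; exact ihL c hcc k
    refine ⟨?_, hfold _ _ hc1⟩
    exact hfold _ _ hc1 cur

theorem pv_dfsA_avoid (edges : List (Int × Int)) (hpre : Pre_solve edges)
    (hD1 : pvDist? edges (-1) = some 1) :
    ∀ (fuel : Nat) (cur : Int) (d : Nat) (parent : Int) (counter : PySem.Dict Int Int),
    pvDist? edges cur = some d → cur ≠ -1 →
    (∀ x ∈ (pvNbr edges cur).filter (fun w => decide (w ≠ parent)),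
      x ∈ pvChildren edges cur ∧ x ≠ (-1 : Int)) →
    PySem.Dict.getD (pvDfsA (pvAdjA edges) fuel cur parent counter).2 (-1) 0
      = PySem.Dict.getD counter (-1) 0 := by
  intro fuel
  induction fuel with
  | zero => intro cur d parent counter _ _ _; rfl
  | succ fuel ih =>
    intro cur d parent counter hcur hcurne hflt
    have h2 : (pvDfsA (pvAdjA edges) (fuel+1) cur parent counter).2 =
        ((pvNbr edges cur).foldl (fun counter next =>
            if next ≠ parent then
              let r := pvDfsA (pvAdjA edges) fuel next cur counter
              r.2.modify cur 0 (· + r.1)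
            else counter) (counter.modify cur 0 (· + 1))) := rfl
    rw [h2]
    rw [PySem.List.foldl_ite_eq_foldl_filter (p := fun next => next ≠ parent)
      (f := fun counter next => ((pvDfsA (pvAdjA edges) fuel next cur counter).2).modify cur 0
        (· + (pvDfsA (pvAdjA edges) fuel next cur counter).1)) (pvNbr edges cur)]
    have hstart : PySem.Dict.getD (counter.modify cur 0 (· + 1)) (-1) 0
        = PySem.Dict.getD counter (-1) 0 := by
      rw [PySem.Dict.getD_modify, if_neg (fun h => hcurne h.symm)]
    have hfold : ∀ (L : List Int) (c : PySem.Dict Int Int),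
        (∀ x ∈ L, x ∈ pvChildren edges cur ∧ x ≠ (-1 : Int)) →
        PySem.Dict.getD (L.foldl (fun counter next =>
          ((pvDfsA (pvAdjA edges) fuel next cur counter).2).modify cur 0
            (· + (pvDfsA (pvAdjA edges) fuel next cur counter).1)) c) (-1) 0
          = PySem.Dict.getD c (-1) 0 := by
      intro L
      induction L with
      | nil => intro c _; rfl
      | cons x L ihL =>
        intro c hL
        obtain ⟨hxc, hxne⟩ := hL x List.mem_cons_self
        have hxd : pvDist? edges x = some (d+1) := pv_child_dist edges hcur hxc
        have hxflt : ∀ y ∈ (pvNbr edges x).filter (fun w => decide (w ≠ cur)),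
            y ∈ pvChildren edges x ∧ y ≠ (-1 : Int) := by
          intro y hy
          have hfeq : (pvNbr edges x).filter (fun w => decide (w ≠ cur))
              = pvChildren edges x :=
            pv_filter_ne_parent edges hpre (pv_reach_of_dist edges hxd)
              (pv_child_parent edges hpre hcur hxc)
          rw [hfeq] at hy
          refine ⟨hy, ?_⟩
          intro hym
          have hyd : pvDist? edges y = some (d+1+1) := pv_child_dist edges hxd hy
          rw [hym, hD1] at hyd
          injection hyd with h3
          omega
        simp only [List.foldl_cons]
        rw [ihL _ (fun y hy => hL y (List.mem_cons_of_mem x hy))]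
        rw [PySem.Dict.getD_modify, if_neg (fun h => hcurne h.symm)]
        exact ih x (d+1) cur c hxd hxne hxflt
    rw [hfold (List.filter (fun w => decide (w ≠ parent)) (pvNbr edges cur))
      (counter.modify cur 0 (· + 1)) hflt, hstart]

theorem pv_tight (edges : List (Int × Int)) (hpre : Pre_solve edges) (hD : D_solve edges) :
    solve edges ≠ solve_alt edges := by
  intro heq
  have hm1 : (-1 : Int) ∈ pvNbr edges 0 := (pv_neg_one_nbr_zero edges).mpr hD
  have hd1 : pvDist? edges (-1) = some 1 := pv_nbr_zero_dist edges hpre hm1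
  -- A's dfs skips -1 entirely, so its count stays 0
  have hA1 : PySem.Dict.getD (pvCntA edges) (-1) 0 = 0 := by
    have hflt : ∀ x ∈ (pvNbr edges 0).filter (fun w => decide (w ≠ (-1 : Int))),
        x ∈ pvChildren edges 0 ∧ x ≠ (-1 : Int) := by
      intro x hx
      obtain ⟨hxm, hxd⟩ := List.mem_filter.mp hx
      refine ⟨?_, by simpa using hxd⟩
      rw [pv_children_root_eq_nbr edges hpre]
      exact hxm
    have havoid := pv_dfsA_avoid edges hpre hd1 (2 * edges.length + 2) 0 0 (-1)
      PySem.Dict.empty (pv_dist?_zero edges) (by norm_num) hflt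
    rw [show pvCntA edges
      = (pvDfsA (pvAdjA edges) (2 * edges.length + 2) 0 (-1) PySem.Dict.empty).2 from rfl,
      havoid, PySem.Dict.getD_empty]
  have hA0 : 0 ≤ PySem.Dict.getD (pvCntA edges) 0 0 :=
    (pv_dfsA_nonneg edges (2 * edges.length + 2) 0 (-1) PySem.Dict.empty
      (fun k => by rw [PySem.Dict.getD_empty])).2 0
  -- B counts the real subtree hanging off -1
  have hBv := pv_B_val edges hpre
  have hBm1 : PySem.Dict.getD (pvCntB edges) (-1) 0
      = ((pvSubAt edges (-1) 1).length : Int) := by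
    rw [hBv (-1), pv_sizeI_of_dist edges hd1]
  have hB0 : PySem.Dict.getD (pvCntB edges) 0 0
      = ((pvSubAt edges 0 0).length : Int) := by
    rw [hBv 0, pv_sizeI_of_dist edges (pv_dist?_zero edges)]
  have hchild : (-1 : Int) ∈ pvChildren edges 0 :=
    (pv_mem_children edges).mpr ⟨0, pv_dist?_zero edges, hm1, hd1⟩
  have hsle : (pvSubAt edges (-1) 1).length + 1 ≤ (pvSubAt edges 0 0).length := by
    rw [pv_sub_eq edges (pv_dist?_zero edges)]
    simp only [List.length_cons, List.length_flatMap]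
    have hmem : (pvSubAt edges (-1) (0+1)).length ∈
        (pvChildren edges 0).map (fun c => (pvSubAt edges c (0+1)).length) :=
      List.mem_map.mpr ⟨-1, hchild, rfl⟩
    have hle := List.single_le_sum (fun x _ => Nat.zero_le x) _ hmem
    simp only [Nat.zero_add] at hle ⊢
    omega
  have hs1 : 1 ≤ (pvSubAt edges (-1) 1).length := by
    have hself : (-1 : Int) ∈ pvSubAt edges (-1) 1 := pv_mem_sub_self edges _ (-1)
    have := List.length_pos_iff.mpr (List.ne_nil_of_mem hself)
    omega
  have hs1' : (1 : Int) ≤ ((pvSubAt edges (-1) 1).length : Int) := by exact_mod_cast hs1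
  have hts : ((pvSubAt edges (-1) 1).length : Int) + 1
      ≤ ((pvSubAt edges 0 0).length : Int) := by exact_mod_cast hsle
  have hstot : ((pvSubAt edges (-1) 1).length : Int)
      ≤ ((pvSubAt edges 0 0).length : Int) := by omega
  have hpos : 0 < ((pvSubAt edges (-1) 1).length : Int) *
      (((pvSubAt edges 0 0).length : Int) - ((pvSubAt edges (-1) 1).length : Int)) :=
    mul_pos (by omega) (by omega)
  rw [pv_solve_map, pv_solve_alt_map, List.map_eq_map_iff] at heq
  have hAe : min (PySem.Dict.getD (pvCntA edges) 0 0) (PySem.Dict.getD (pvCntA edges) (-1) 0)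
      * (PySem.Dict.getD (pvCntA edges) 0 0
        - min (PySem.Dict.getD (pvCntA edges) 0 0) (PySem.Dict.getD (pvCntA edges) (-1) 0))
      = 0 := by
    rw [hA1, min_eq_right hA0, zero_mul]
  have hBe : min (PySem.Dict.getD (pvCntB edges) 0 0) (PySem.Dict.getD (pvCntB edges) (-1) 0)
      * (PySem.Dict.getD (pvCntB edges) 0 0
        - min (PySem.Dict.getD (pvCntB edges) 0 0) (PySem.Dict.getD (pvCntB edges) (-1) 0))
      ≠ 0 := by
    rw [hBm1, hB0, min_eq_right hstot]
    exact ne_of_gt hpos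
  rcases hD with hp | hp
  · have h : min (PySem.Dict.getD (pvCntA edges) 0 0) (PySem.Dict.getD (pvCntA edges) (-1) 0)
        * (PySem.Dict.getD (pvCntA edges) 0 0
          - min (PySem.Dict.getD (pvCntA edges) 0 0) (PySem.Dict.getD (pvCntA edges) (-1) 0))
        = min (PySem.Dict.getD (pvCntB edges) 0 0) (PySem.Dict.getD (pvCntB edges) (-1) 0)
        * (PySem.Dict.getD (pvCntB edges) 0 0
          - min (PySem.Dict.getD (pvCntB edges) 0 0) (PySem.Dict.getD (pvCntB edges) (-1) 0)) :=
      heq ((0 : Int), (-1 : Int)) hp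
    exact hBe (h ▸ hAe)
  · have h : min (PySem.Dict.getD (pvCntA edges) (-1) 0) (PySem.Dict.getD (pvCntA edges) 0 0)
        * (PySem.Dict.getD (pvCntA edges) 0 0
          - min (PySem.Dict.getD (pvCntA edges) (-1) 0) (PySem.Dict.getD (pvCntA edges) 0 0))
        = min (PySem.Dict.getD (pvCntB edges) (-1) 0) (PySem.Dict.getD (pvCntB edges) 0 0)
        * (PySem.Dict.getD (pvCntB edges) 0 0
          - min (PySem.Dict.getD (pvCntB edges) (-1) 0) (PySem.Dict.getD (pvCntB edges) 0 0)) :=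
      heq ((-1 : Int), (0 : Int)) hp
    rw [min_comm (PySem.Dict.getD (pvCntA edges) (-1) 0) _,
      min_comm (PySem.Dict.getD (pvCntB edges) (-1) 0) _] at h
    exact hBe (h ▸ hAe)

-- ===== VERDICT (by name: the statements are the Claim_ definitions above) =====
theorem solve_spec : Claim_unchanged_solve := by
  intro edges _ hpre hd
  exact pv_main edges hpre hd

theorem solve_changed : Claim_changed_solve := by
  unfold Claim_changed_solve; decide

theorem solve_tight : Claim_exact_solve := by
  intro edges _ hpre hD
  exact pv_tight edges hpre hD
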